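-- pv_equiv track=rewrite | github.com/Revi1337/BaekJoon-Coding-Test | 백준/Gold/2458. 키 순서/키 순서.py | solution
-- ===== SOURCE A (Python) =====
-- def solution(n, m, edges):
--     graph = [[0] * (n + 1) for _ in range(n + 1)]
--     for v1, v2 in edges:
--         graph[v1][v2] = 1
--
--     for bridge in range(1, n + 1):
--         for from_ in range(1, n + 1):
--             for to_ in range(1, n + 1):
--                 if graph[from_][bridge] == 1 and graph[bridge][to_] == 1:
--                     graph[from_][to_] = 1
--
--     answer = [0] * (n + 1)
--     for from_ in range(1, n + 1):
--         for to_ in range(1, n + 1):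
--             if graph[from_][to_] == 1:
--                 answer[from_] += 1
--                 answer[to_] += 1
--
--     return answer.count(n - 1)
-- ===== SOURCE B (Python) =====
-- def solution(n, m, edges):
--     # per-node DFS on forward and reverse adjacency lists: a node's height order is
--     # fully determined iff (#reachable) + (#co-reachable) == n - 1
--     adj = [[] for _ in range(n + 1)]
--     radj = [[] for _ in range(n + 1)]
--     for a, b in edges:
--         adj[a].append(b)
--         radj[b].append(a)
--
--     def count_reach(g, start):
--         seen = [False] * (n + 1)
--         cnt = 0
--         stack = list(g[start])
--         while stack:
--             v = stack.pop()
--             if not seen[v]: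
--                 seen[v] = True
--                 cnt += 1
--                 stack.extend(g[v])
--         return cnt
--
--     total = 0
--     for v in range(1, n + 1):
--         if count_reach(adj, v) + count_reach(radj, v) == n - 1:
--             total += 1
--     return total
-- ===== Notes on version B (the rewrite author's own statement) =====
-- stated objective: faster
-- what changed: Replaces A's O(n^3) triple-loop Floyd-Warshall transitive-closure matrix by per-node iterative DFS over forward and reverse adjacency lists, counting reachable and co-reachable nodes directly.
-- intended difference: For n = 1, A's answer.count(n-1) also counts the unused 0-th slot of its answer array (whose value 0 equals n-1), so A returns one more than the number of height-determined students (e.g. 2 for a single student); B counts only the real students 1..n and returns the intended value, one less than A. — e.g. on solution(1, 0, []): A returns 2, B returns 1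
-- outside the precondition, e.g. on solution(2, 1, [(0, 1)]): A returns 0, B returns 1; on solution(2, 1, [(1, 0)]): A returns 0, B returns 1
import Mathlib
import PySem

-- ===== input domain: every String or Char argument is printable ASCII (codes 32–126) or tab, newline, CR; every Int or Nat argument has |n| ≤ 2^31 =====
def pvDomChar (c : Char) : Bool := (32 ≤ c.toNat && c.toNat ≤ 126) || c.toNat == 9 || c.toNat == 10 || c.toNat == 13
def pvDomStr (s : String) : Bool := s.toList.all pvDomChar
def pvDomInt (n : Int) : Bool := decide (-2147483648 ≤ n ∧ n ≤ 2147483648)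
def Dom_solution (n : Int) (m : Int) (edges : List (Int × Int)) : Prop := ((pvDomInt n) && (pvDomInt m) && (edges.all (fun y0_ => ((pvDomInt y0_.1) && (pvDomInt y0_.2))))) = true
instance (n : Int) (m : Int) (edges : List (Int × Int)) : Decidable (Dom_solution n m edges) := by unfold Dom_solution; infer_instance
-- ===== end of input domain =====

-- B replaces A's O(n^3) triple-loop Floyd-Warshall closure matrix by per-node iterative DFS over
-- forward and reverse adjacency lists, counting reachable and co-reachable nodes directly.

-- ===== PORT A =====
-- graph[i][j] read/write helpers (Python list-of-lists indexing)
def pvMGet (g : List (List Int)) (i j : Int) : Int :=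
  PySem.List.pyGetD (PySem.List.pyGetD g i []) j 0

def pvMSet (g : List (List Int)) (i j v : Int) : List (List Int) :=
  PySem.List.pySetD g i (PySem.List.pySetD (PySem.List.pyGetD g i []) j v)

-- answer[x] += 1
def pvBump (a : List Int) (x : Int) : List Int :=
  PySem.List.pySetD a x (PySem.List.pyGetD a x 0 + 1)

-- the 'for to_ in …' loop of A's Floyd-Warshall
def pvA_innerL (f k : Int) (ts : List Int) (g : List (List Int)) : List (List Int) :=
  ts.foldl (fun g t => if pvMGet g f k = 1 ∧ pvMGet g k t = 1 then pvMSet g f t 1 else g) g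

-- the 'for from_ in …' loop
def pvA_midL (k : Int) (fs ts : List Int) (g : List (List Int)) : List (List Int) :=
  fs.foldl (fun g f => pvA_innerL f k ts g) g

-- the 'for bridge in …' loop
def pvA_closL (ks fs ts : List Int) (g : List (List Int)) : List (List Int) :=
  ks.foldl (fun g k => pvA_midL k fs ts g) g

-- the 'for to_ in …' loop of A's counting phase
def pvA_cntInner (g : List (List Int)) (f : Int) (ts : List Int) (a : List Int) : List Int :=
  ts.foldl (fun a t => if pvMGet g f t = 1 then pvBump (pvBump a f) t else a) a

def pvA_cntOuter (g : List (List Int)) (fs ts : List Int) (a : List Int) : List Int :=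
  fs.foldl (fun a f => pvA_cntInner g f ts a) a

def solution (n : Int) (m : Int) (edges : List (Int × Int)) : Int :=
  let g0 : List (List Int) :=
    (PySem.List.pyRange 0 (n+1) 1).map (fun _ => List.replicate (n+1).toNat (0:Int))
  let g1 := edges.foldl (fun g e => pvMSet g e.1 e.2 1) g0
  let g2 := pvA_closL (PySem.List.pyRange 1 (n+1) 1) (PySem.List.pyRange 1 (n+1) 1)
              (PySem.List.pyRange 1 (n+1) 1) g1
  let a0 : List Int := List.replicate (n+1).toNat (0:Int)
  let a1 := pvA_cntOuter g2 (PySem.List.pyRange 1 (n+1) 1) (PySem.List.pyRange 1 (n+1) 1) a0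
  (PySem.List.count a1 (n-1) : Int)

-- ===== PORT B =====
-- g[a].append(b)
def pvAdjPush (g : List (List Int)) (a b : Int) : List (List Int) :=
  PySem.List.pySetD g a ((PySem.List.pyGetD g a []) ++ [b])

-- g[v]
def pvRow (g : List (List Int)) (v : Int) : List Int := PySem.List.pyGetD g v []

-- the 'while stack:' loop of count_reach: pop from the end; if unseen, mark, count, push its row
def pvDfsB (g : List (List Int)) : Nat → List Int → List Bool → Int → Int
  | 0, _, _, cnt => cnt
  | _ + 1, [], _, cnt => cnt
  | fuel + 1, h :: t, seen, cnt =>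
    let v := (h :: t).getLast (by simp)
    let rest := (h :: t).dropLast
    if PySem.List.pyGetD seen v false then pvDfsB g fuel rest seen cnt
    else pvDfsB g fuel (rest ++ pvRow g v) (PySem.List.pySetD seen v true) (cnt + 1)

-- totality fuel for the while loop: each iteration pops one element and at most
-- |g[start]| plus the total adjacency size many elements are ever pushed
def pvCountReach (n : Int) (g : List (List Int)) (start : Int) : Int :=
  pvDfsB g ((pvRow g start).length + g.flatten.length) (pvRow g start)
    (List.replicate (n+1).toNat false) 0

def solution_alt (n : Int) (m : Int) (edges : List (Int × Int)) : Int :=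
  let init : List (List Int) := (PySem.List.pyRange 0 (n+1) 1).map (fun _ => ([] : List Int))
  let ar := edges.foldl (fun p e => (pvAdjPush p.1 e.1 e.2, pvAdjPush p.2 e.2 e.1)) (init, init)
  (PySem.List.pyRange 1 (n+1) 1).foldl (fun acc v =>
    if pvCountReach n ar.1 v + pvCountReach n ar.2 v = n - 1 then acc + 1 else acc) 0

-- ===== PRECONDITION & SPEC =====
-- Python's list indexing identifies a label x with x+(n+1) when x is negative
def pvW (n x : Int) : Int := if x < 0 then x + (n+1) else x

-- a label names a real student: its (possibly wrapped) index lies in 1..n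
def pvLab (n x : Int) : Prop := 1 ≤ pvW n x ∧ pvW n x ≤ n

-- Pre_ restricts to the problem's natural domain: every comparison label names a student 1..n
-- (negative labels alias students through Python's index wraparound, which both programs resolve
-- identically, and are admitted).  Labels aliasing the matrix's unused row/column 0 (0 and
-- -(n+1)), on which A still returns by silently ignoring them while B's traversal would count a
-- phantom node 0, are malformed input outside the problem's domain and are excluded; for n < 0
-- both programs return 0 on an empty comparison list (with any comparison A raises there).
def Pre_solution (n : Int) (m : Int) (edges : List (Int × Int)) : Prop :=
  (n < 0 ∧ edges = []) ∨
  (0 ≤ n ∧ ∀ e ∈ edges, pvLab n e.1 ∧ pvLab n e.2)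

instance (n : Int) (m : Int) (edges : List (Int × Int)) : Decidable (Pre_solution n m edges) := by
  unfold Pre_solution pvLab pvW; infer_instance

def pvWitness_solution : Int × Int × (List (Int × Int)) := (2, 1, [(1, 2)])

-- For n = 1, A's answer.count(n-1) also counts the unused 0-th slot of its answer array (whose value 0
-- equals n-1), returning one more than the number of height-determined students; B counts only the real
-- students 1..n, which is the intended value.
def D_solution (n : Int) (m : Int) (edges : List (Int × Int)) : Prop := n = 1

instance (n : Int) (m : Int) (edges : List (Int × Int)) : Decidable (D_solution n m edges) := by
  unfold D_solution; infer_instance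

def Spec_solution (n : Int) (m : Int) (edges : List (Int × Int)) (out : Int) : Prop :=
  ¬ D_solution n m edges → out = solution_alt n m edges

instance (n : Int) (m : Int) (edges : List (Int × Int)) (out : Int) :
    Decidable (Spec_solution n m edges out) := by unfold Spec_solution; infer_instance

def pvDiffWitness_solution : Int × Int × (List (Int × Int)) := (1, 0, [])
def pvDiffWitnessOut_solution : Int × Int := (2, 1)

-- ===== CLAIM (what is proved, stated in full; the proofs are below) =====
def Claim_unchanged_solution : Prop := ∀ (n : Int) (m : Int) (edges : List (Int × Int)),
  Dom_solution n m edges → Pre_solution n m edges → Spec_solution n m edges (solution n m edges)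

def Claim_changed_solution : Prop :=
  Dom_solution (pvDiffWitness_solution.1) (pvDiffWitness_solution.2.1) (pvDiffWitness_solution.2.2) ∧
  Pre_solution (pvDiffWitness_solution.1) (pvDiffWitness_solution.2.1) (pvDiffWitness_solution.2.2) ∧
  D_solution (pvDiffWitness_solution.1) (pvDiffWitness_solution.2.1) (pvDiffWitness_solution.2.2) ∧
  solution (pvDiffWitness_solution.1) (pvDiffWitness_solution.2.1) (pvDiffWitness_solution.2.2) = pvDiffWitnessOut_solution.1 ∧
  solution_alt (pvDiffWitness_solution.1) (pvDiffWitness_solution.2.1) (pvDiffWitness_solution.2.2) = pvDiffWitnessOut_solution.2 ∧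
  pvDiffWitnessOut_solution.1 ≠ pvDiffWitnessOut_solution.2

def Claim_exact_solution : Prop := ∀ (n : Int) (m : Int) (edges : List (Int × Int)),
  Dom_solution n m edges → Pre_solution n m edges → D_solution n m edges →
  solution n m edges ≠ solution_alt n m edges

-- ===== LEMMAS AND PROOFS =====

-- the plan: both sides are reduced to the transitive closure (Relation.TransGen) of the comparison
-- relation — A via a pointwise characterisation of its in-place Warshall matrix, B via soundness and
-- completeness of its worklist DFS — and then to the same count over students 1..n.

def pvN (n : Int) : Nat := (n+1).toNat

def pvWFg (n : Int) (g : List (List Int)) : Prop :=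
  g.length = pvN n ∧ ∀ row ∈ g, row.length = pvN n

lemma pv_toNat_lt {n i : Int} (hn : 0 ≤ n) (hi : 0 ≤ i) (hi' : i ≤ n) : i.toNat < pvN n := by
  unfold pvN; omega

lemma pvMGet_eq {n : Int} {g : List (List Int)} (hg : pvWFg n g) (hn : 0 ≤ n)
    {i j : Int} (hi : 0 ≤ i) (hi' : i ≤ n) (hj : 0 ≤ j) (hj' : j ≤ n) :
    pvMGet g i j = (g.getD i.toNat []).getD j.toNat 0 := by
  obtain ⟨hlen, hrows⟩ := hg
  have h1 : i.toNat < g.length := by rw [hlen]; exact pv_toNat_lt hn hi hi'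
  have hrow : g[i.toNat] ∈ g := List.getElem_mem _
  have h2 : j.toNat < (g[i.toNat]).length := by rw [hrows _ hrow]; exact pv_toNat_lt hn hj hj'
  unfold pvMGet
  rw [PySem.List.pyGetD_eq_getElem g [] hi (by omega)]
  rw [PySem.List.pyGetD_eq_getElem _ 0 hj (by omega)]
  rw [List.getD_eq_getElem _ _ h1, List.getD_eq_getElem _ _ h2]

lemma pvMSet_eq {n : Int} {g : List (List Int)} (hg : pvWFg n g) (hn : 0 ≤ n)
    {i j : Int} (hi : 0 ≤ i) (hi' : i ≤ n) (hj : 0 ≤ j) (hj' : j ≤ n) (v : Int) :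
    pvMSet g i j v = g.set i.toNat ((g.getD i.toNat []).set j.toNat v) := by
  obtain ⟨hlen, hrows⟩ := hg
  have h1 : i.toNat < g.length := by rw [hlen]; exact pv_toNat_lt hn hi hi'
  unfold pvMSet
  rw [PySem.List.pyGetD_eq_getElem g [] hi (by omega)]
  rw [PySem.List.pySetD_of_nonneg _ _ hj, PySem.List.pySetD_of_nonneg _ _ hi]
  rw [List.getD_eq_getElem _ _ h1]

lemma pvWFg_set {n : Int} {g : List (List Int)} (hg : pvWFg n g) (hn : 0 ≤ n)
    {i j : Int} (hi : 0 ≤ i) (hi' : i ≤ n) (hj : 0 ≤ j) (hj' : j ≤ n) (v : Int) :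
    pvWFg n (pvMSet g i j v) := by
  obtain ⟨hlen, hrows⟩ := hg
  have h1 : i.toNat < g.length := by rw [hlen]; exact pv_toNat_lt hn hi hi'
  rw [pvMSet_eq ⟨hlen, hrows⟩ hn hi hi' hj hj' v]
  constructor
  · simpa using hlen
  · intro row hrow
    rcases List.mem_or_eq_of_mem_set hrow with h | h
    · exact hrows _ h
    · subst h
      rw [List.getD_eq_getElem _ _ h1]
      simp [hrows _ (List.getElem_mem _)]

lemma pvMGet_pvMSet {n : Int} {g : List (List Int)} (hg : pvWFg n g) (hn : 0 ≤ n)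
    {a b i j : Int} (ha : 0 ≤ a) (ha' : a ≤ n) (hb : 0 ≤ b) (hb' : b ≤ n)
    (hi : 0 ≤ i) (hi' : i ≤ n) (hj : 0 ≤ j) (hj' : j ≤ n) (v : Int) :
    pvMGet (pvMSet g a b v) i j = if i = a ∧ j = b then v else pvMGet g i j := by
  obtain ⟨hlen, hrows⟩ := hg
  have hwf' := pvWFg_set ⟨hlen, hrows⟩ hn ha ha' hb hb' v
  rw [pvMGet_eq hwf' hn hi hi' hj hj', pvMSet_eq ⟨hlen, hrows⟩ hn ha ha' hb hb' v,
      pvMGet_eq ⟨hlen, hrows⟩ hn hi hi' hj hj']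
  have h1 : a.toNat < g.length := by rw [hlen]; exact pv_toNat_lt hn ha ha'
  have h2 : i.toNat < g.length := by rw [hlen]; exact pv_toNat_lt hn hi hi'
  have h2' : i.toNat < (g.set a.toNat ((g[a.toNat]).set b.toNat v)).length := by
    simpa using h2
  rw [List.getD_eq_getElem _ _ h1, List.getD_eq_getElem _ _ h2', List.getElem_set,
      List.getD_eq_getElem _ _ h2]
  have h3 : j.toNat < (g[i.toNat]).length := by
    rw [hrows _ (List.getElem_mem _)]; exact pv_toNat_lt hn hj hj'
  by_cases hia : i = a
  · have hia' : a.toNat = i.toNat := by omega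
    subst hia
    simp only [hia', eq_self_iff_true, if_true, true_and]
    rw [List.getD_eq_getElem _ _ (by simpa using h3), List.getD_eq_getElem _ _ h3,
        List.getElem_set]
    by_cases hjb : j = b
    · have hbj : b.toNat = j.toNat := by omega
      simp [hbj, hjb]
    · have hbj : b.toNat ≠ j.toNat := by omega
      simp [hbj, hjb]
  · have : a.toNat ≠ i.toNat := by omega
    simp [this, hia]

lemma pvMSet_noop {n : Int} {g : List (List Int)} (hg : pvWFg n g) (hn : 0 ≤ n)
    {a b v : Int} (ha : 0 ≤ a) (ha' : a ≤ n) (hb : 0 ≤ b) (hb' : b ≤ n)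
    (h : pvMGet g a b = v) : pvMSet g a b v = g := by
  obtain ⟨hlen, hrows⟩ := hg
  have h1 : a.toNat < g.length := by rw [hlen]; exact pv_toNat_lt hn ha ha'
  have h3 : b.toNat < (g[a.toNat]).length := by
    rw [hrows _ (List.getElem_mem _)]; exact pv_toNat_lt hn hb hb'
  rw [pvMSet_eq ⟨hlen, hrows⟩ hn ha ha' hb hb' v]
  rw [pvMGet_eq ⟨hlen, hrows⟩ hn ha ha' hb hb'] at h
  rw [List.getD_eq_getElem _ _ h1] at h ⊢
  rw [List.getD_eq_getElem _ _ h3] at h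
  rw [← h, List.set_getElem_self, List.set_getElem_self]

def pvR (n : Int) : List Int := PySem.List.pyRange 1 (n+1) 1

lemma pv_mem_pvR {n j : Int} : j ∈ pvR n ↔ 1 ≤ j ∧ j ≤ n := by
  unfold pvR
  rw [PySem.List.mem_pyRange_one]
  omega

lemma pv_nodup_pvR {n : Int} : (pvR n).Nodup := PySem.List.nodup_pyRange_one 1 (n+1)

lemma pvA_innerL_self {n k : Int} (hn : 0 ≤ n) (hk1 : 1 ≤ k) (hk2 : k ≤ n) :
    ∀ ts : List Int, (∀ t ∈ ts, 1 ≤ t ∧ t ≤ n) → ∀ g, pvWFg n g →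
    pvA_innerL k k ts g = g := by
  intro ts
  induction ts with
  | nil => intro _ g _; rfl
  | cons t ts ih =>
    intro hts g hg
    obtain ⟨ht1, ht2⟩ := hts t (by simp)
    have hstep : (if pvMGet g k k = 1 ∧ pvMGet g k t = 1 then pvMSet g k t 1 else g) = g := by
      by_cases hc : pvMGet g k k = 1 ∧ pvMGet g k t = 1
      · rw [if_pos hc]
        exact pvMSet_noop hg hn (by omega) hk2 (by omega) ht2 hc.2
      · rw [if_neg hc]
    unfold pvA_innerL
    simp only [List.foldl_cons]
    rw [hstep]
    exact ih (fun t' ht' => hts t' (by simp [ht'])) g hg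

lemma pvA_innerL_ne {n f k : Int} (hn : 0 ≤ n) (hf1 : 1 ≤ f) (hf2 : f ≤ n)
    (hk1 : 1 ≤ k) (hk2 : k ≤ n) (hfk : f ≠ k) :
    ∀ ts : List Int, (∀ t ∈ ts, 1 ≤ t ∧ t ≤ n) → ∀ g, pvWFg n g →
    pvWFg n (pvA_innerL f k ts g) ∧
    ∀ i j : Int, 1 ≤ i → i ≤ n → 1 ≤ j → j ≤ n →
      pvMGet (pvA_innerL f k ts g) i j =
        if i = f ∧ j ∈ ts ∧ pvMGet g f k = 1 ∧ pvMGet g k j = 1 then 1 else pvMGet g i j := by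
  intro ts
  induction ts with
  | nil =>
    intro _ g hg
    exact ⟨hg, by intro i j _ _ _ _; simp [pvA_innerL]⟩
  | cons t ts ih =>
    intro hts g hg
    obtain ⟨ht1, ht2⟩ := hts t (by simp)
    set g1 := if pvMGet g f k = 1 ∧ pvMGet g k t = 1 then pvMSet g f t 1 else g with hg1def
    have hwg1 : pvWFg n g1 := by
      rw [hg1def]; split_ifs
      · exact pvWFg_set hg hn (by omega) hf2 (by omega) ht2 1
      · exact hg
    have hget1 : ∀ i j : Int, 1 ≤ i → i ≤ n → 1 ≤ j → j ≤ n →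
        pvMGet g1 i j = if i = f ∧ j = t ∧ pvMGet g f k = 1 ∧ pvMGet g k t = 1 then 1
          else pvMGet g i j := by
      intro i j h1 h2 h3 h4
      rw [hg1def]
      by_cases hc : pvMGet g f k = 1 ∧ pvMGet g k t = 1
      · rw [if_pos hc, pvMGet_pvMSet hg hn (by omega) hf2 (by omega) ht2 (by omega) h2 (by omega) h4 1]
        by_cases h5 : i = f ∧ j = t
        · rw [if_pos h5, if_pos ⟨h5.1, h5.2, hc⟩]
        · rw [if_neg h5, if_neg (by tauto)]
      · rw [if_neg hc, if_neg (by tauto)]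
    have hstab1 : pvMGet g1 f k = pvMGet g f k := by
      rw [hget1 f k hf1 hf2 hk1 hk2]
      by_cases hc : k = t ∧ pvMGet g f k = 1 ∧ pvMGet g k t = 1
      · rw [if_pos ⟨rfl, hc⟩, hc.2.1]
      · rw [if_neg (by tauto)]
    have hstab2 : ∀ j : Int, 1 ≤ j → j ≤ n → pvMGet g1 k j = pvMGet g k j := by
      intro j h3 h4
      rw [hget1 k j hk1 hk2 h3 h4, if_neg (by tauto)]
    have hrec := ih (fun t' ht' => hts t' (by simp [ht'])) g1 hwg1
    have hfold : pvA_innerL f k (t :: ts) g = pvA_innerL f k ts g1 := by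
      unfold pvA_innerL
      simp only [List.foldl_cons]
      rw [← hg1def]
    rw [hfold]
    refine ⟨hrec.1, ?_⟩
    intro i j h1 h2 h3 h4
    rw [hrec.2 i j h1 h2 h3 h4, hstab1, hstab2 j h3 h4, hget1 i j h1 h2 h3 h4]
    by_cases hPfk : pvMGet g f k = 1
    · by_cases hPkj : pvMGet g k j = 1
      · by_cases hif : i = f
        · by_cases hjt : j ∈ ts
          · rw [if_pos ⟨hif, hjt, hPfk, hPkj⟩, if_pos ⟨hif, by simp [hjt], hPfk, hPkj⟩]
          · by_cases hjt2 : j = t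
            · rw [if_neg (by tauto), if_pos ⟨hif, hjt2, hPfk, by rw [← hjt2] at *; exact hPkj⟩,
                 if_pos ⟨hif, by simp [hjt2], hPfk, hPkj⟩]
            · rw [if_neg (by tauto), if_neg (by tauto), if_neg (by
                intro hcon
                rcases hcon with ⟨_, hmem, _⟩
                simp at hmem
                tauto)]
        · rw [if_neg (by tauto), if_neg (by tauto), if_neg (by tauto)]
      · by_cases hjt2 : j = t
        · subst hjt2
          by_cases hc2 : pvMGet g k j = 1
          · exact absurd hc2 hPkj
          · rw [if_neg (by tauto), if_neg (by tauto), if_neg (by tauto)]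
        · rw [if_neg (by tauto), if_neg (by tauto), if_neg (by tauto)]
    · rw [if_neg (by tauto), if_neg (by tauto), if_neg (by tauto)]

lemma pvA_midL_spec {n k : Int} (hn : 0 ≤ n) (hk1 : 1 ≤ k) (hk2 : k ≤ n) :
    ∀ fs : List Int, (∀ f ∈ fs, 1 ≤ f ∧ f ≤ n) → ∀ g, pvWFg n g →
    pvWFg n (pvA_midL k fs (pvR n) g) ∧
    (∀ i j : Int, 1 ≤ i → i ≤ n → 1 ≤ j → j ≤ n →
      (pvMGet (pvA_midL k fs (pvR n) g) i j = 1 ↔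
        pvMGet g i j = 1 ∨ (i ∈ fs ∧ pvMGet g i k = 1 ∧ pvMGet g k j = 1))) ∧
    (∀ i : Int, 1 ≤ i → i ≤ n → pvMGet (pvA_midL k fs (pvR n) g) i k = pvMGet g i k) ∧
    (∀ j : Int, 1 ≤ j → j ≤ n → pvMGet (pvA_midL k fs (pvR n) g) k j = pvMGet g k j) := by
  intro fs
  induction fs with
  | nil =>
    intro _ g hg
    refine ⟨hg, ?_, ?_, ?_⟩
    · intro i j h1 h2 h3 h4; simp [pvA_midL]
    · intro i h1 h2; simp [pvA_midL]
    · intro j h1 h2; simp [pvA_midL]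
  | cons f fs ih =>
    intro hfs g hg
    obtain ⟨hf1, hf2⟩ := hfs f (by simp)
    have hR : ∀ t ∈ pvR n, 1 ≤ t ∧ t ≤ n := fun t ht => pv_mem_pvR.mp ht
    have hfold : pvA_midL k (f :: fs) (pvR n) g = pvA_midL k fs (pvR n) (pvA_innerL f k (pvR n) g) := by
      unfold pvA_midL; simp only [List.foldl_cons]
    rw [hfold]
    by_cases hfk : f = k
    · subst hfk
      rw [pvA_innerL_self hn hf1 hf2 (pvR n) hR g hg]
      have hrec := ih (fun f' hf' => hfs f' (by simp [hf'])) g hg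
      refine ⟨hrec.1, ?_, hrec.2.2.1, hrec.2.2.2⟩
      intro i j h1 h2 h3 h4
      rw [hrec.2.1 i j h1 h2 h3 h4]
      constructor
      · intro h; rcases h with h | ⟨hm, hx⟩
        · exact Or.inl h
        · exact Or.inr ⟨by simp [hm], hx⟩
      · intro h; rcases h with h | ⟨hm, hik, hkj⟩
        · exact Or.inl h
        · rcases List.mem_cons.mp hm with hif | hif
          · subst hif
            exact Or.inl hkj
          · exact Or.inr ⟨hif, hik, hkj⟩
    · have hinner := pvA_innerL_ne hn hf1 hf2 hk1 hk2 hfk (pvR n) hR g hg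
      set g1 := pvA_innerL f k (pvR n) g with hg1def
      have hget1 : ∀ i j : Int, 1 ≤ i → i ≤ n → 1 ≤ j → j ≤ n →
          pvMGet g1 i j = if i = f ∧ pvMGet g f k = 1 ∧ pvMGet g k j = 1 then 1
            else pvMGet g i j := by
        intro i j h1 h2 h3 h4
        rw [hinner.2 i j h1 h2 h3 h4]
        by_cases hc : i = f ∧ pvMGet g f k = 1 ∧ pvMGet g k j = 1
        · rw [if_pos ⟨hc.1, pv_mem_pvR.mpr ⟨h3, h4⟩, hc.2⟩, if_pos hc]
        · rw [if_neg (by tauto), if_neg hc]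
      have hstabc : ∀ i : Int, 1 ≤ i → i ≤ n → pvMGet g1 i k = pvMGet g i k := by
        intro i h1 h2
        rw [hget1 i k h1 h2 hk1 hk2]
        by_cases hc : i = f ∧ pvMGet g f k = 1 ∧ pvMGet g k k = 1
        · obtain ⟨hif, hP1, hP2⟩ := hc
          subst hif
          rw [if_pos ⟨rfl, hP1, hP2⟩]
          omega
        · rw [if_neg hc]
      have hstabr : ∀ j : Int, 1 ≤ j → j ≤ n → pvMGet g1 k j = pvMGet g k j := by
        intro j h3 h4
        rw [hget1 k j hk1 hk2 h3 h4, if_neg (by tauto)]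
      have hrec := ih (fun f' hf' => hfs f' (by simp [hf'])) g1 hinner.1
      refine ⟨hrec.1, ?_, ?_, ?_⟩
      · intro i j h1 h2 h3 h4
        rw [hrec.2.1 i j h1 h2 h3 h4, hstabc i h1 h2, hstabr j h3 h4, hget1 i j h1 h2 h3 h4]
        by_cases hc : i = f ∧ pvMGet g f k = 1 ∧ pvMGet g k j = 1
        · rw [if_pos hc]
          constructor
          · intro _; exact Or.inr ⟨by simp [hc.1], by rw [hc.1]; exact hc.2.1, hc.2.2⟩
          · intro _; exact Or.inl rfl
        · rw [if_neg hc]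
          constructor
          · intro h; rcases h with h | ⟨hm, hx⟩
            · exact Or.inl h
            · exact Or.inr ⟨by simp [hm], hx⟩
          · intro h; rcases h with h | ⟨hm, hik, hkj⟩
            · exact Or.inl h
            · rcases List.mem_cons.mp hm with hif | hif
              · exact absurd ⟨hif, by rw [hif] at hik; exact hik, hkj⟩ hc
              · exact Or.inr ⟨hif, hik, hkj⟩
      · intro i h1 h2
        rw [hrec.2.2.1 i h1 h2, hstabc i h1 h2]
      · intro j h3 h4
        rw [hrec.2.2.2 j h3 h4, hstabr j h3 h4]

-- the zero matrix
lemma pvWFg_zero {n : Int} (hn : 0 ≤ n) :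
    pvWFg n ((PySem.List.pyRange 0 (n+1) 1).map (fun _ => List.replicate (n+1).toNat (0:Int))) := by
  constructor
  · simp [PySem.List.length_pyRange_one, pvN]
  · intro row hrow
    rcases List.mem_map.mp hrow with ⟨_, _, h⟩
    rw [← h]
    simp [pvN]

lemma pvMGet_zero {n i j : Int} (hn : 0 ≤ n) (hi : 0 ≤ i) (hi' : i ≤ n) (hj : 0 ≤ j) (hj' : j ≤ n) :
    pvMGet ((PySem.List.pyRange 0 (n+1) 1).map (fun _ => List.replicate (n+1).toNat (0:Int))) i j
      = 0 := by
  have hwg := pvWFg_zero (n := n) hn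
  rw [pvMGet_eq hwg hn hi hi' hj hj']
  have hi2 : i.toNat < ((PySem.List.pyRange 0 (n+1) 1).map
      (fun _ => List.replicate (n+1).toNat (0:Int))).length := by
    rw [hwg.1]; exact pv_toNat_lt hn hi hi'
  rw [List.getD_eq_getElem _ _ hi2]
  simp

-- wrapped (negative) Python indices
lemma pv_pyIdx_wrap (L : Nat) {a : Int} (h1 : -(L:Int) ≤ a) (h2 : a < 0) :
    PySem.List.pyIdx? L a = PySem.List.pyIdx? L (a + L) := by
  simp only [PySem.List.pyIdx?]
  rw [if_neg (by omega), if_pos h1, if_pos (by omega : (0:Int) ≤ a + L),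
      if_pos (by omega : a + (L:Int) < L)]
  congr 1
  omega

lemma pv_pyGetD_wrap {α : Type} (xs : List α) (d : α) {a : Int}
    (h1 : -(xs.length:Int) ≤ a) (h2 : a < 0) :
    PySem.List.pyGetD xs a d = PySem.List.pyGetD xs (a + xs.length) d := by
  simp only [PySem.List.pyGetD, PySem.List.pyGet?]
  rw [pv_pyIdx_wrap xs.length h1 h2]

lemma pv_pySetD_wrap {α : Type} (xs : List α) (v : α) {a : Int}
    (h1 : -(xs.length:Int) ≤ a) (h2 : a < 0) :
    PySem.List.pySetD xs a v = PySem.List.pySetD xs (a + xs.length) v := by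
  simp only [PySem.List.pySetD, PySem.List.pySet?]
  rw [pv_pyIdx_wrap xs.length h1 h2]

lemma pvLab_bounds {n x : Int} (h : pvLab n x) : -(n+1) < x ∧ x ≤ n := by
  unfold pvLab pvW at h
  split_ifs at h <;> omega

lemma pvRowW {n : Int} {g : List (List Int)} (hlen : g.length = pvN n) (hn : 0 ≤ n)
    {x : Int} (hx : pvLab n x) : pvRow g x = pvRow g (pvW n x) := by
  unfold pvRow pvW
  split_ifs with h
  · have hb := pvLab_bounds hx
    have hc : ((g.length : Nat) : Int) = n + 1 := by rw [hlen]; unfold pvN; omega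
    rw [pv_pyGetD_wrap g [] (by omega) h, hc]
  · rfl

lemma pvMSet_wrapW {n : Int} {g : List (List Int)} (hg : pvWFg n g) (hn : 0 ≤ n)
    {a b : Int} (ha : pvLab n a) (hb : pvLab n b) (v : Int) :
    pvMSet g a b v = pvMSet g (pvW n a) (pvW n b) v := by
  obtain ⟨ha1, ha2⟩ := ha
  obtain ⟨hb1, hb2⟩ := hb
  have hrow : PySem.List.pyGetD g a [] = PySem.List.pyGetD g (pvW n a) [] :=
    pvRowW hg.1 hn ⟨ha1, ha2⟩
  have hlt : (pvW n a) < (g.length : Int) := by rw [hg.1]; unfold pvN; omega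
  have hrlen : (PySem.List.pyGetD g (pvW n a) []).length = pvN n := by
    rw [PySem.List.pyGetD_eq_getElem g [] (by omega) hlt]
    exact hg.2 _ (List.getElem_mem _)
  have hcol : ∀ X : List Int, X.length = pvN n →
      PySem.List.pySetD X b v = PySem.List.pySetD X (pvW n b) v := by
    intro X hX
    unfold pvW
    split_ifs with h
    · have hbb := pvLab_bounds ⟨hb1, hb2⟩
      have hc : ((X.length : Nat) : Int) = n + 1 := by rw [hX]; unfold pvN; omega
      rw [pv_pySetD_wrap X v (by omega) h, hc]
    · rfl
  have hrowset : ∀ X : List Int, PySem.List.pySetD g a X = PySem.List.pySetD g (pvW n a) X := by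
    intro X
    unfold pvW
    split_ifs with h
    · have hba := pvLab_bounds ⟨ha1, ha2⟩
      have hc : ((g.length : Nat) : Int) = n + 1 := by rw [hg.1]; unfold pvN; omega
      rw [pv_pySetD_wrap g X (by omega) h, hc]
    · rfl
  show PySem.List.pySetD g a (PySem.List.pySetD (PySem.List.pyGetD g a []) b v) = _
  rw [hrow, hcol _ hrlen, hrowset]
  rfl

-- the comparison relation on wrapped (student-index) labels
def pvC (n : Int) (edges : List (Int × Int)) (a b : Int) : Prop :=
  ∃ e ∈ edges, pvW n e.1 = a ∧ pvW n e.2 = b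

-- phase 1 of A: writing the edges into the matrix
lemma pvEdges_fold {n : Int} (hn : 0 ≤ n) :
    ∀ es : List (Int × Int), (∀ e ∈ es, pvLab n e.1 ∧ pvLab n e.2) →
    ∀ g, pvWFg n g →
    pvWFg n (es.foldl (fun g e => pvMSet g e.1 e.2 1) g) ∧
    ∀ i j : Int, 1 ≤ i → i ≤ n → 1 ≤ j → j ≤ n →
      ((pvMGet (es.foldl (fun g e => pvMSet g e.1 e.2 1) g) i j = 1) ↔
        pvMGet g i j = 1 ∨ pvC n es i j) := by
  intro es
  induction es with
  | nil =>
    intro _ g hg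
    refine ⟨hg, ?_⟩
    intro i j _ _ _ _
    unfold pvC
    simp
  | cons e es ih =>
    intro hes g hg
    obtain ⟨ha, hb⟩ := hes e (by simp)
    have hwa1 : 1 ≤ pvW n e.1 := ha.1
    have hwa2 : pvW n e.1 ≤ n := ha.2
    have hwb1 : 1 ≤ pvW n e.2 := hb.1
    have hwb2 : pvW n e.2 ≤ n := hb.2
    simp only [List.foldl_cons]
    rw [show pvMSet g e.1 e.2 1 = pvMSet g (pvW n e.1) (pvW n e.2) 1 from
      pvMSet_wrapW hg hn ha hb 1]
    have hwf' := pvWFg_set hg hn (by omega) hwa2 (by omega) hwb2 1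
    have hrec := ih (fun e' he' => hes e' (by simp [he'])) _ hwf'
    refine ⟨hrec.1, ?_⟩
    intro i j h1 h2 h3 h4
    rw [hrec.2 i j h1 h2 h3 h4,
        pvMGet_pvMSet hg hn (by omega) hwa2 (by omega) hwb2 (by omega) h2 (by omega) h4 1]
    unfold pvC
    constructor
    · intro h
      rcases h with h | h
      · by_cases hc : i = pvW n e.1 ∧ j = pvW n e.2
        · exact Or.inr ⟨e, by simp, hc.1.symm, hc.2.symm⟩
        · rw [if_neg hc] at h
          exact Or.inl h
      · rcases h with ⟨e', he', hh⟩
        exact Or.inr ⟨e', by simp [he'], hh⟩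
    · intro h
      rcases h with h | ⟨e', he', hh1, hh2⟩
      · by_cases hc : i = pvW n e.1 ∧ j = pvW n e.2
        · exact Or.inl (by rw [if_pos hc])
        · exact Or.inl (by rw [if_neg hc]; exact h)
      · rcases List.mem_cons.mp he' with h | h
        · subst h
          exact Or.inl (by rw [if_pos ⟨hh1.symm, hh2.symm⟩])
        · exact Or.inr ⟨e', h, hh1, hh2⟩

-- the relation A's in-place Warshall loop computes, bridge by bridge
def pvWrel : List Int → (Int → Int → Prop) → Int → Int → Prop
  | [], R, i, j => R i j
  | k :: ks, R, i, j => pvWrel ks (fun a b => R a b ∨ (R a k ∧ R k b)) i j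

lemma pvClosL_spec {n : Int} (hn : 0 ≤ n) :
    ∀ ks : List Int, (∀ k ∈ ks, 1 ≤ k ∧ k ≤ n) → ∀ g (R : Int → Int → Prop), pvWFg n g →
    (∀ i j : Int, 1 ≤ i → i ≤ n → 1 ≤ j → j ≤ n → (pvMGet g i j = 1 ↔ R i j)) →
    pvWFg n (pvA_closL ks (pvR n) (pvR n) g) ∧
    ∀ i j : Int, 1 ≤ i → i ≤ n → 1 ≤ j → j ≤ n →
      (pvMGet (pvA_closL ks (pvR n) (pvR n) g) i j = 1 ↔ pvWrel ks R i j) := by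
  intro ks
  induction ks with
  | nil =>
    intro _ g R hg hR
    exact ⟨hg, by intro i j h1 h2 h3 h4; exact hR i j h1 h2 h3 h4⟩
  | cons k ks ih =>
    intro hks g R hg hR
    obtain ⟨hk1, hk2⟩ := hks k (by simp)
    have hRmem : ∀ x ∈ pvR n, 1 ≤ x ∧ x ≤ n := fun x hx => pv_mem_pvR.mp hx
    have hmid := pvA_midL_spec hn hk1 hk2 (pvR n) hRmem g hg
    have hfold : pvA_closL (k :: ks) (pvR n) (pvR n) g =
        pvA_closL ks (pvR n) (pvR n) (pvA_midL k (pvR n) (pvR n) g) := by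
      unfold pvA_closL; simp only [List.foldl_cons]
    rw [hfold]
    exact ih (fun k' hk' => hks k' (by simp [hk'])) _ _ hmid.1 (by
      intro i j h1 h2 h3 h4
      rw [hmid.2.1 i j h1 h2 h3 h4]
      have e1 := hR i j h1 h2 h3 h4
      have e2 := hR i k h1 h2 hk1 hk2
      have e3 := hR k j hk1 hk2 h3 h4
      have : i ∈ pvR n := pv_mem_pvR.mpr ⟨h1, h2⟩
      tauto)

-- nonempty E-paths whose intermediate vertices all satisfy S
inductive pvPB (E : Int → Int → Prop) (S : Int → Prop) : Int → Int → Prop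
  | single {i j : Int} : E i j → pvPB E S i j
  | cons {i m j : Int} : E i m → S m → pvPB E S m j → pvPB E S i j

-- absorbing a first step into k before a path out of k, at the level of the augmented relation
lemma pvPB_absorb {E : Int → Int → Prop} {S : Int → Prop} {i k j : Int}
    (hik : E i k) (h : pvPB (fun a b => E a b ∨ (E a k ∧ E k b)) S k j) :
    pvPB (fun a b => E a b ∨ (E a k ∧ E k b)) S i j := by
  cases h with
  | single h =>
    rcases h with h | ⟨_, h⟩
    · exact pvPB.single (Or.inr ⟨hik, h⟩)
    · exact pvPB.single (Or.inr ⟨hik, h⟩)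
  | cons hstep hS tail =>
    rcases hstep with h | ⟨_, h⟩
    · exact pvPB.cons (Or.inr ⟨hik, h⟩) hS tail
    · exact pvPB.cons (Or.inr ⟨hik, h⟩) hS tail

lemma pvWrel_iff_PB : ∀ (ks : List Int) (E : Int → Int → Prop) (i j : Int),
    pvWrel ks E i j ↔ pvPB E (fun m => m ∈ ks) i j := by
  intro ks
  induction ks with
  | nil =>
    intro E i j
    constructor
    · intro h; exact pvPB.single h
    · intro h
      cases h with
      | single h => exact h
      | cons _ hS _ => simp at hS
  | cons k ks ih =>
    intro E i j
    show pvWrel ks _ i j ↔ _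
    rw [ih]
    constructor
    · intro h
      induction h with
      | single h =>
        rcases h with h | ⟨h1, h2⟩
        · exact pvPB.single h
        · exact pvPB.cons h1 (by simp) (pvPB.single h2)
      | cons hstep hS _ htail =>
        rcases hstep with h | ⟨h1, h2⟩
        · exact pvPB.cons h (by simp [hS]) htail
        · exact pvPB.cons h1 (by simp) (pvPB.cons h2 (by simp [hS]) htail)
    · intro h
      induction h with
      | single h => exact pvPB.single (Or.inl h)
      | cons hstep hS _ htail =>
        rcases List.mem_cons.mp hS with hm | hm
        · subst hm
          exact pvPB_absorb hstep htail
        · exact pvPB.cons (Or.inl hstep) hm htail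

lemma pvPB_iff_transGen {E : Int → Int → Prop} {S : Int → Prop}
    (hE : ∀ a b, E a b → S b) (i j : Int) :
    pvPB E S i j ↔ Relation.TransGen E i j := by
  constructor
  · intro h
    induction h with
    | single h => exact Relation.TransGen.single h
    | cons hstep _ _ htail => exact Relation.TransGen.head hstep htail
  · intro h
    induction h using Relation.TransGen.head_induction_on with
    | single h => exact pvPB.single h
    | head hstep _ htail => exact pvPB.cons hstep (hE _ _ hstep) htail

-- A's counting phase
lemma pvBump_len {a : List Int} {x : Int} : (pvBump a x).length = a.length := by
  unfold pvBump
  exact PySem.List.length_pySetD a x _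

lemma pvBump_get {n : Int} (hn : 0 ≤ n) {a : List Int} (hlen : a.length = pvN n)
    {x v : Int} (hx : 0 ≤ x) (hx' : x ≤ n) (hv : 0 ≤ v) (hv' : v ≤ n) :
    PySem.List.pyGetD (pvBump a x) v 0 = PySem.List.pyGetD a v 0 + (if v = x then 1 else 0) := by
  have h1 : x.toNat < a.length := by rw [hlen]; exact pv_toNat_lt hn hx hx'
  have h2 : v.toNat < a.length := by rw [hlen]; exact pv_toNat_lt hn hv hv'
  unfold pvBump
  rw [PySem.List.pySetD_of_nonneg _ _ hx]
  rw [PySem.List.pyGetD_eq_getElem _ _ hv (by simp; omega),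
      PySem.List.pyGetD_eq_getElem _ _ hv (by omega)]
  rw [List.getElem_set]
  by_cases hvx : v = x
  · have : x.toNat = v.toNat := by omega
    rw [if_pos this, if_pos hvx]
    rw [PySem.List.pyGetD_eq_getElem _ _ hx (by omega)]
    simp [this]
  · have : x.toNat ≠ v.toNat := by omega
    rw [if_neg this, if_neg hvx]
    omega

lemma pvA_cntInner_spec {n : Int} (hn : 0 ≤ n) (g : List (List Int)) {f : Int}
    (hf1 : 1 ≤ f) (hf2 : f ≤ n) :
    ∀ ts : List Int, (∀ t ∈ ts, 1 ≤ t ∧ t ≤ n) → ∀ a : List Int, a.length = pvN n →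
    (pvA_cntInner g f ts a).length = pvN n ∧
    ∀ v : Int, 0 ≤ v → v ≤ n →
      PySem.List.pyGetD (pvA_cntInner g f ts a) v 0 = PySem.List.pyGetD a v 0 +
        (ts.map (fun t => if pvMGet g f t = 1 then
          (if v = f then (1:Int) else 0) + (if v = t then 1 else 0) else 0)).sum := by
  intro ts
  induction ts with
  | nil =>
    intro _ a hlen
    exact ⟨hlen, by intro v _ _; simp [pvA_cntInner]⟩
  | cons t ts ih =>
    intro hts a hlen
    obtain ⟨ht1, ht2⟩ := hts t (by simp)
    set a1 := if pvMGet g f t = 1 then pvBump (pvBump a f) t else a with ha1def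
    have hlen1 : a1.length = pvN n := by
      rw [ha1def]; split_ifs <;> simp [pvBump_len, hlen]
    have hget1 : ∀ v : Int, 0 ≤ v → v ≤ n →
        PySem.List.pyGetD a1 v 0 = PySem.List.pyGetD a v 0 +
          (if pvMGet g f t = 1 then
            (if v = f then (1:Int) else 0) + (if v = t then 1 else 0) else 0) := by
      intro v hv hv'
      rw [ha1def]
      by_cases hc : pvMGet g f t = 1
      · rw [if_pos hc, if_pos hc,
            pvBump_get hn (by rw [pvBump_len, hlen]) (by omega) ht2 hv hv',
            pvBump_get hn hlen (by omega) hf2 hv hv', add_assoc]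
      · rw [if_neg hc, if_neg hc, add_zero]
    have hfold : pvA_cntInner g f (t :: ts) a = pvA_cntInner g f ts a1 := by
      unfold pvA_cntInner
      simp only [List.foldl_cons]
      rw [← ha1def]
    rw [hfold]
    have hrec := ih (fun t' ht' => hts t' (by simp [ht'])) a1 hlen1
    refine ⟨hrec.1, ?_⟩
    intro v hv hv'
    rw [hrec.2 v hv hv', hget1 v hv hv']
    simp only [List.map_cons, List.sum_cons]
    rw [add_assoc]

lemma pvA_cntOuter_spec {n : Int} (hn : 0 ≤ n) (g : List (List Int)) :
    ∀ fs : List Int, (∀ f ∈ fs, 1 ≤ f ∧ f ≤ n) → ∀ a : List Int, a.length = pvN n →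
    (pvA_cntOuter g fs (pvR n) a).length = pvN n ∧
    ∀ v : Int, 0 ≤ v → v ≤ n →
      PySem.List.pyGetD (pvA_cntOuter g fs (pvR n) a) v 0 = PySem.List.pyGetD a v 0 +
        (fs.map (fun f => ((pvR n).map (fun t => if pvMGet g f t = 1 then
          (if v = f then (1:Int) else 0) + (if v = t then 1 else 0) else 0)).sum)).sum := by
  intro fs
  induction fs with
  | nil =>
    intro _ a hlen
    exact ⟨hlen, by intro v _ _; simp [pvA_cntOuter]⟩
  | cons f fs ih =>
    intro hfs a hlen
    obtain ⟨hf1, hf2⟩ := hfs f (by simp)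
    have hR : ∀ t ∈ pvR n, 1 ≤ t ∧ t ≤ n := fun t ht => pv_mem_pvR.mp ht
    have hinner := pvA_cntInner_spec hn g hf1 hf2 (pvR n) hR a hlen
    have hfold : pvA_cntOuter g (f :: fs) (pvR n) a =
        pvA_cntOuter g fs (pvR n) (pvA_cntInner g f (pvR n) a) := by
      unfold pvA_cntOuter; simp only [List.foldl_cons]
    rw [hfold]
    have hrec := ih (fun f' hf' => hfs f' (by simp [hf'])) _ hinner.1
    refine ⟨hrec.1, ?_⟩
    intro v hv hv'
    rw [hrec.2 v hv hv', hinner.2 v hv hv']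
    simp only [List.map_cons, List.sum_cons]
    rw [add_assoc]

def pvOut (n : Int) (g : List (List Int)) (i : Int) : Nat :=
  (pvR n).countP (fun t => pvMGet g i t == 1)

def pvIn (n : Int) (g : List (List Int)) (v : Int) : Nat :=
  (pvR n).countP (fun f => pvMGet g f v == 1)

def pvDegA (n : Int) (g : List (List Int)) (v : Int) : Int :=
  (pvOut n g v : Int) + (pvIn n g v : Int)

lemma pv_sum_pick (c : Int → Int) :
    ∀ l : List Int, l.Nodup → ∀ v : Int,
    (l.map (fun f => if v = f then c f else 0)).sum = if v ∈ l then c v else 0 := by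
  intro l
  induction l with
  | nil => intro _ v; simp
  | cons x l ih =>
    intro hnd v
    simp only [List.map_cons, List.sum_cons]
    rw [ih hnd.of_cons v]
    by_cases hvx : v = x
    · subst hvx
      rw [if_pos rfl, if_neg (List.nodup_cons.mp hnd).1, add_zero, if_pos (by simp)]
    · rw [if_neg hvx]
      by_cases hm : v ∈ l
      · rw [if_pos hm, if_pos (by simp [hm]), zero_add]
      · rw [if_neg hm, if_neg (by simp [hvx, hm]), zero_add]

lemma pv_sumInner (g : List (List Int)) (f v : Int) :
    ∀ ts : List Int, ts.Nodup →
    (ts.map (fun t => if pvMGet g f t = 1 then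
        (if v = f then (1:Int) else 0) + (if v = t then 1 else 0) else 0)).sum
    = (if v = f then ((ts.countP (fun t => pvMGet g f t == 1)) : Int) else 0) +
      (if v ∈ ts ∧ pvMGet g f v = 1 then 1 else 0) := by
  intro ts
  induction ts with
  | nil => intro _; simp
  | cons t ts ih =>
    intro hnd
    simp only [List.map_cons, List.sum_cons, List.countP_cons]
    rw [ih (List.nodup_cons.mp hnd).2]
    by_cases hvt : v = t
    · subst hvt
      have hvm : v ∉ ts := (List.nodup_cons.mp hnd).1
      by_cases hvf : v = f
      · subst hvf
        by_cases hft : pvMGet g v v = 1 <;> simp [hft, hvm] <;> push_cast <;> omega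
      · by_cases hft : pvMGet g f v = 1 <;> simp [hft, hvm, hvf] <;> push_cast <;> omega
    · by_cases hvf : v = f
      · subst hvf
        by_cases hft : pvMGet g v t = 1 <;> by_cases hvm : v ∈ ts <;>
          simp [hft, hvm, hvt] <;> push_cast <;> omega
      · by_cases hft : pvMGet g f t = 1 <;> by_cases hvm : v ∈ ts <;>
          simp [hft, hvm, hvt, hvf] <;> push_cast <;> omega

lemma pv_sumOuter {n : Int} (g : List (List Int)) (v : Int) (hv : 0 ≤ v) (hv' : v ≤ n) :
    ((pvR n).map (fun f => ((pvR n).map (fun t => if pvMGet g f t = 1 then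
        (if v = f then (1:Int) else 0) + (if v = t then 1 else 0) else 0)).sum)).sum
    = if 1 ≤ v then pvDegA n g v else 0 := by
  have hc1 : (pvR n).map (fun f => ((pvR n).map (fun t => if pvMGet g f t = 1 then
        (if v = f then (1:Int) else 0) + (if v = t then 1 else 0) else 0)).sum)
      = (pvR n).map (fun f =>
          (if v = f then (((pvR n).countP (fun t => pvMGet g f t == 1)) : Int) else 0) +
          (if v ∈ pvR n ∧ pvMGet g f v = 1 then 1 else 0)) :=
    List.map_congr_left (fun f _ => pv_sumInner g f v (pvR n) pv_nodup_pvR)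
  rw [hc1]
  rw [PySem.List.sum_map_add_int]
  rw [pv_sum_pick (fun f => ((pvR n).countP (fun t => pvMGet g f t == 1) : Int)) (pvR n)
      pv_nodup_pvR v]
  by_cases h1 : 1 ≤ v
  · have hvR : v ∈ pvR n := pv_mem_pvR.mpr ⟨h1, hv'⟩
    rw [if_pos hvR, if_pos h1]
    have h2 : ((pvR n).map (fun f => if v ∈ pvR n ∧ pvMGet g f v = 1 then (1:Int) else 0)).sum
        = ((pvR n).map (fun f => if (pvMGet g f v == 1) = true then (1:Int) else 0)).sum := by
      apply congrArg
      apply List.map_congr_left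
      intro f _
      by_cases hc : pvMGet g f v = 1
      · rw [if_pos ⟨hvR, hc⟩, if_pos (by simp [hc])]
      · rw [if_neg (by tauto), if_neg (by simp [hc])]
    rw [h2, PySem.List.sum_map_ite_one_zero]
    rfl
  · have hvR : v ∉ pvR n := fun h => h1 (pv_mem_pvR.mp h).1
    rw [if_neg hvR, if_neg h1]
    have h2 : ((pvR n).map (fun f => if v ∈ pvR n ∧ pvMGet g f v = 1 then (1:Int) else 0)).sum
        = ((pvR n).map (fun _ => (0:Int))).sum := by
      apply congrArg
      apply List.map_congr_left
      intro f _
      rw [if_neg (by tauto)]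
    rw [h2]
    simp

lemma pv_a0_get {n v : Int} (hn : 0 ≤ n) (hv : 0 ≤ v) (hv' : v ≤ n) :
    PySem.List.pyGetD (List.replicate (n+1).toNat (0:Int)) v 0 = 0 := by
  rw [PySem.List.pyGetD_eq_getElem _ _ hv (by simp; omega)]
  simp

-- B's adjacency lists
lemma pvRow_sub {g : List (List Int)} {v : Int} : ∀ w ∈ pvRow g v, w ∈ g.flatten := by
  intro w hw
  unfold pvRow PySem.List.pyGetD at hw
  cases h : PySem.List.pyGet? g v with
  | none => rw [h] at hw; simp at hw
  | some r =>
    rw [h] at hw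
    exact List.mem_flatten.mpr ⟨r, PySem.List.mem_of_pyGet?_eq_some g h, hw⟩

lemma pvAdjPush_len {g : List (List Int)} {a b : Int} :
    (pvAdjPush g a b).length = g.length := PySem.List.length_pySetD g a _

lemma pvRow_push {n : Int} {g : List (List Int)} (hlen : g.length = pvN n) (hn : 0 ≤ n)
    {a : Int} (ha : 0 ≤ a) (ha' : a ≤ n) {i : Int} (hi : 0 ≤ i) (hi' : i ≤ n) (b : Int) :
    pvRow (pvAdjPush g a b) i = if i = a then pvRow g a ++ [b] else pvRow g i := by
  have h1 : a.toNat < g.length := by rw [hlen]; exact pv_toNat_lt hn ha ha'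
  have h2 : i.toNat < g.length := by rw [hlen]; exact pv_toNat_lt hn hi hi'
  unfold pvRow pvAdjPush
  rw [PySem.List.pySetD_of_nonneg _ _ ha]
  have h2' : (i:Int) < ((g.set a.toNat (PySem.List.pyGetD g a [] ++ [b])).length : Int) := by
    simp; omega
  rw [PySem.List.pyGetD_eq_getElem _ _ hi h2', PySem.List.pyGetD_eq_getElem _ _ hi (by omega)]
  rw [List.getElem_set]
  by_cases hia : i = a
  · have : a.toNat = i.toNat := by omega
    rw [if_pos this, if_pos hia]
  · have : a.toNat ≠ i.toNat := by omega
    rw [if_neg this, if_neg hia]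

lemma pvAdjPush_flatten {g : List (List Int)} {a b : Int} (ha : 0 ≤ a)
    {w : Int} (hw : w ∈ (pvAdjPush g a b).flatten) : w ∈ g.flatten ∨ w = b := by
  unfold pvAdjPush at hw
  rw [PySem.List.pySetD_of_nonneg _ _ ha] at hw
  rcases List.mem_flatten.mp hw with ⟨r, hr, hwr⟩
  rcases List.mem_or_eq_of_mem_set hr with h | h
  · exact Or.inl (List.mem_flatten.mpr ⟨r, h, hwr⟩)
  · subst h
    rcases List.mem_append.mp hwr with h | h
    · exact Or.inl (pvRow_sub _ h)
    · simp at h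
      exact Or.inr h

lemma pvBuild_spec {n : Int} (hn : 0 ≤ n) (f sv : Int × Int → Int) :
    ∀ es : List (Int × Int), (∀ e ∈ es, pvLab n (f e)) →
    ∀ g : List (List Int), g.length = pvN n →
    (es.foldl (fun g e => pvAdjPush g (f e) (sv e)) g).length = pvN n ∧
    (∀ w ∈ (es.foldl (fun g e => pvAdjPush g (f e) (sv e)) g).flatten,
      w ∈ g.flatten ∨ ∃ e ∈ es, w = sv e) ∧
    (∀ a : Int, 1 ≤ a → a ≤ n → ∀ b : Int,
      (b ∈ pvRow (es.foldl (fun g e => pvAdjPush g (f e) (sv e)) g) a ↔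
        b ∈ pvRow g a ∨ ∃ e ∈ es, pvW n (f e) = a ∧ sv e = b)) := by
  intro es
  induction es with
  | nil =>
    intro _ g hlen
    refine ⟨hlen, by intro w hw; exact Or.inl hw, ?_⟩
    intro a _ _ b
    simp
  | cons e es ih =>
    intro hes g hlen
    have hfe : pvLab n (f e) := hes e (by simp)
    have hf0 : 0 ≤ pvW n (f e) := by unfold pvLab at hfe; omega
    have hf2 : pvW n (f e) ≤ n := hfe.2
    have hwrap : pvAdjPush g (f e) (sv e) = pvAdjPush g (pvW n (f e)) (sv e) := by
      have hrow : PySem.List.pyGetD g (f e) [] = PySem.List.pyGetD g (pvW n (f e)) [] :=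
        pvRowW hlen hn hfe
      unfold pvAdjPush
      rw [hrow]
      unfold pvW
      split_ifs with h
      · have hbx := pvLab_bounds hfe
        have hc : ((g.length : Nat) : Int) = n + 1 := by rw [hlen]; unfold pvN; omega
        rw [pv_pySetD_wrap g _ (by omega) h, hc]
      · rfl
    simp only [List.foldl_cons]
    rw [hwrap]
    have hlen' : (pvAdjPush g (pvW n (f e)) (sv e)).length = pvN n := by
      rw [pvAdjPush_len, hlen]
    have hrec := ih (fun e' he' => hes e' (by simp [he'])) _ hlen'
    refine ⟨hrec.1, ?_, ?_⟩
    · intro w hw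
      rcases hrec.2.1 w hw with h | ⟨e', he', hwe⟩
      · rcases pvAdjPush_flatten hf0 h with h | h
        · exact Or.inl h
        · exact Or.inr ⟨e, by simp, h⟩
      · exact Or.inr ⟨e', by simp [he'], hwe⟩
    · intro a h1 h2 b
      rw [(hrec.2.2) a h1 h2 b,
          pvRow_push hlen hn hf0 hf2 (by omega) h2 (sv e)]
      by_cases hae : a = pvW n (f e)
      · rw [if_pos hae]
        constructor
        · intro h
          rcases h with h | h
          · rcases List.mem_append.mp h with h | h
            · exact Or.inl (by rw [hae]; exact h)
            · simp at h
              exact Or.inr ⟨e, by simp, hae.symm, h.symm⟩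
          · rcases h with ⟨e', he', hh⟩
            exact Or.inr ⟨e', by simp [he'], hh⟩
        · intro h
          rcases h with h | ⟨e', he', hfe', hse'⟩
          · exact Or.inl (List.mem_append.mpr (Or.inl (by rw [← hae]; exact h)))
          · rcases List.mem_cons.mp he' with h | h
            · subst h
              exact Or.inl (List.mem_append.mpr (Or.inr (by simp [hse'])))
            · exact Or.inr ⟨e', h, hfe', hse'⟩
      · rw [if_neg hae]
        constructor
        · intro h
          rcases h with h | ⟨e', he', hh⟩
          · exact Or.inl h
          · exact Or.inr ⟨e', by simp [he'], hh⟩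
        · intro h
          rcases h with h | ⟨e', he', hfe', hse'⟩
          · exact Or.inl h
          · rcases List.mem_cons.mp he' with h | h
            · subst h
              exact absurd hfe'.symm hae
            · exact Or.inr ⟨e', h, hfe', hse'⟩

lemma pvInit_row {n : Int} (a : Int) :
    pvRow ((PySem.List.pyRange 0 (n+1) 1).map (fun _ => ([] : List Int))) a = [] := by
  unfold pvRow PySem.List.pyGetD
  cases h : PySem.List.pyGet? ((PySem.List.pyRange 0 (n+1) 1).map (fun _ => ([] : List Int))) a with
  | none => simp
  | some r =>
    have hm := PySem.List.mem_of_pyGet?_eq_some _ h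
    rcases List.mem_map.mp hm with ⟨_, _, hr⟩
    simp [← hr]

lemma pvInit_flatten {n : Int} :
    ((PySem.List.pyRange 0 (n+1) 1).map (fun _ => ([] : List Int))).flatten = [] := by
  simp

lemma pvInit_len {n : Int} (hn : 0 ≤ n) :
    ((PySem.List.pyRange 0 (n+1) 1).map (fun _ => ([] : List Int))).length = pvN n := by
  simp [PySem.List.length_pyRange_one, pvN]

-- proof-side abstraction of B's loop: the same worklist DFS over a set of (wrapped) labels;
-- the ports' boolean-array loop is proved to simulate it below (pvSim)
def pvDfs (g : List (List Int)) : Nat → List Int → PySem.Set Int → PySem.Set Int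
  | 0, _, seen => seen
  | _ + 1, [], seen => seen
  | fuel + 1, h :: t, seen =>
    let v := (h :: t).getLast (by simp)
    let rest := (h :: t).dropLast
    if PySem.Set.contains seen v then pvDfs g fuel rest seen
    else pvDfs g fuel (rest ++ pvRow g v) (PySem.Set.add seen v)

-- the loop's decreasing measure
def pvMu (g : List (List Int)) (seen : PySem.Set Int) (stack : List Int) : Nat :=
  stack.length +
    (((PySem.List.dedup g.flatten).filter (fun u => !PySem.Set.contains seen u)).map
      (fun u => (pvRow g u).length)).sum

-- B's DFS: one edge step
def pvStep (g : List (List Int)) (a b : Int) : Prop := b ∈ pvRow g a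

lemma pvDfs_mono (g : List (List Int)) :
    ∀ (fuel : Nat) (stack : List Int) (seen : PySem.Set Int) (x : Int),
      x ∈ seen → x ∈ pvDfs g fuel stack seen := by
  intro fuel
  induction fuel with
  | zero => intro stack seen x hx; exact hx
  | succ f ih =>
    intro stack seen x hx
    cases stack with
    | nil => exact hx
    | cons h t =>
      show x ∈ (if PySem.Set.contains seen ((h :: t).getLast (by simp)) then _ else _)
      split_ifs with hc
      · exact ih _ _ _ hx
      · exact ih _ _ _ ((PySem.Set.mem_add _ _ _).mpr (Or.inl hx))

lemma pvDfs_nodup (g : List (List Int)) :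
    ∀ (fuel : Nat) (stack : List Int) (seen : PySem.Set Int),
      seen.Nodup → (pvDfs g fuel stack seen).Nodup := by
  intro fuel
  induction fuel with
  | zero => intro _ _ h; exact h
  | succ f ih =>
    intro stack seen hnd
    cases stack with
    | nil => exact hnd
    | cons h t =>
      show ((if PySem.Set.contains seen ((h :: t).getLast (by simp)) then _ else _) : PySem.Set Int).Nodup
      split_ifs with hc
      · exact ih _ _ hnd
      · exact ih _ _ (PySem.Set.nodup_add _ _ hnd)

lemma pvDfs_sound (g : List (List Int)) :
    ∀ (fuel : Nat) (stack : List Int) (seen : PySem.Set Int) (u : Int),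
      u ∈ pvDfs g fuel stack seen →
      u ∈ seen ∨ ∃ v ∈ stack, Relation.ReflTransGen (pvStep g) v u := by
  intro fuel
  induction fuel with
  | zero => intro _ _ u h; exact Or.inl h
  | succ f ih =>
    intro stack seen u hu
    cases stack with
    | nil => exact Or.inl hu
    | cons h t =>
      have hne : (h :: t) ≠ [] := by simp
      set v := (h :: t).getLast hne with hv
      set rest := (h :: t).dropLast with hrest
      have hsplit : rest ++ [v] = h :: t := List.dropLast_append_getLast hne
      have hred : pvDfs g (f+1) (h :: t) seen =
          if PySem.Set.contains seen v then pvDfs g f rest seen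
          else pvDfs g f (rest ++ pvRow g v) (PySem.Set.add seen v) := rfl
      rw [hred] at hu
      split_ifs at hu with hc
      · rcases ih _ _ _ hu with h1 | ⟨v', hv', hrt⟩
        · exact Or.inl h1
        · exact Or.inr ⟨v', by rw [← hsplit]; exact List.mem_append.mpr (Or.inl hv'), hrt⟩
      · rcases ih _ _ _ hu with h1 | ⟨v', hv', hrt⟩
        · rcases (PySem.Set.mem_add _ _ _).mp h1 with h1 | h1
          · exact Or.inl h1
          · exact Or.inr ⟨v, by rw [← hsplit]; simp, by rw [h1]⟩
        · rcases List.mem_append.mp hv' with h2 | h2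
          · exact Or.inr ⟨v', by rw [← hsplit]; exact List.mem_append.mpr (Or.inl h2), hrt⟩
          · exact Or.inr ⟨v, by rw [← hsplit]; simp,
              Relation.ReflTransGen.head (show pvStep g v v' from h2) hrt⟩

lemma pvMu_snoc (g : List (List Int)) (seen : PySem.Set Int) (rest : List Int) (v : Int) :
    pvMu g seen (rest ++ [v]) = pvMu g seen rest + 1 := by
  unfold pvMu
  simp [List.length_append]
  omega

lemma pvMu_visit (g : List (List Int)) (seen : PySem.Set Int) (rest : List Int) {v : Int}
    (hv : v ∈ PySem.List.dedup g.flatten) (hvs : v ∉ seen) :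
    pvMu g (PySem.Set.add seen v) (rest ++ pvRow g v) + 1 = pvMu g seen (rest ++ [v]) := by
  have hfilter : (PySem.List.dedup g.flatten).filter
        (fun u => !PySem.Set.contains (PySem.Set.add seen v) u)
      = ((PySem.List.dedup g.flatten).filter (fun u => !PySem.Set.contains seen u)).filter
          (fun u => u != v) := by
    rw [List.filter_filter]
    apply List.filter_congr
    intro u _
    rw [Bool.eq_iff_iff]
    simp only [Bool.not_eq_eq_eq_not, Bool.not_true, Bool.and_eq_true, bne_iff_ne,
      Bool.not_eq_true', ← Bool.not_eq_true]
    simp only [PySem.Set.contains_iff, PySem.Set.mem_add]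
    tauto
  have hvl : v ∈ (PySem.List.dedup g.flatten).filter (fun u => !PySem.Set.contains seen u) := by
    refine List.mem_filter.mpr ⟨hv, ?_⟩
    simp [PySem.Set.contains_iff, hvs]
  have hnd : ((PySem.List.dedup g.flatten).filter (fun u => !PySem.Set.contains seen u)).Nodup :=
    (PySem.List.nodup_dedup _).filter _
  have herase := hnd.erase_eq_filter v
  have hsum : (((PySem.List.dedup g.flatten).filter (fun u => !PySem.Set.contains seen u)).map
        (fun u => (pvRow g u).length)).sum =
      (pvRow g v).length +
        ((((PySem.List.dedup g.flatten).filter (fun u => !PySem.Set.contains seen u)).filter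
          (fun u => u != v)).map (fun u => (pvRow g u).length)).sum := by
    rw [← herase]
    have := ((List.perm_cons_erase hvl).map (fun u => (pvRow g u).length)).sum_eq
    simpa using this
  unfold pvMu
  rw [hfilter]
  simp only [List.length_append, List.length_cons, List.length_nil]
  omega

lemma pvDfs_complete (g : List (List Int)) :
    ∀ (fuel : Nat) (stack : List Int) (seen : PySem.Set Int),
      (∀ x ∈ stack, x ∈ PySem.List.dedup g.flatten) → pvMu g seen stack ≤ fuel →
      (∀ x ∈ stack, x ∈ pvDfs g fuel stack seen) ∧
      (∀ u ∈ pvDfs g fuel stack seen, u ∉ seen →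
        ∀ w ∈ pvRow g u, w ∈ pvDfs g fuel stack seen) := by
  intro fuel
  induction fuel with
  | zero =>
    intro stack seen _ hmu
    have hlen : stack.length = 0 := by
      unfold pvMu at hmu
      omega
    rw [List.length_eq_zero_iff] at hlen
    subst hlen
    exact ⟨by simp, by intro u hu hus w _; exact absurd hu hus⟩
  | succ f ih =>
    intro stack seen hst hmu
    cases stack with
    | nil =>
      exact ⟨by simp, by intro u hu hus w _; exact absurd hu hus⟩
    | cons h t =>
      have hne : (h :: t) ≠ [] := by simp
      set v := (h :: t).getLast hne with hv
      set rest := (h :: t).dropLast with hrest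
      have hsplit : rest ++ [v] = h :: t := List.dropLast_append_getLast hne
      have hred : pvDfs g (f+1) (h :: t) seen =
          if PySem.Set.contains seen v then pvDfs g f rest seen
          else pvDfs g f (rest ++ pvRow g v) (PySem.Set.add seen v) := rfl
      have hmu' : pvMu g seen (rest ++ [v]) ≤ f + 1 := by rw [hsplit]; exact hmu
      rw [pvMu_snoc] at hmu'
      have hrestst : ∀ x ∈ rest, x ∈ PySem.List.dedup g.flatten := by
        intro x hx
        exact hst x (by rw [← hsplit]; exact List.mem_append.mpr (Or.inl hx))
      have hvst : v ∈ PySem.List.dedup g.flatten := hst v (by rw [← hsplit]; simp)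
      rw [hred]
      split_ifs with hc
      · have hvseen : v ∈ seen := (PySem.Set.contains_iff _ _).mp hc
        have hrec := ih rest seen hrestst (by omega)
        constructor
        · intro x hx
          rcases List.mem_append.mp (by rw [hsplit]; exact hx :
              x ∈ rest ++ [v]) with h1 | h1
          · exact hrec.1 x h1
          · simp at h1
            subst h1
            exact pvDfs_mono g _ _ _ _ hvseen
        · exact hrec.2
      · have hvseen : v ∉ seen := fun h => hc ((PySem.Set.contains_iff _ _).mpr h)
        have hmu2 : pvMu g (PySem.Set.add seen v) (rest ++ pvRow g v) ≤ f := by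
          have h1 := pvMu_visit g seen rest hvst hvseen
          have h2 := pvMu_snoc g seen rest v
          omega
        have hst2 : ∀ x ∈ rest ++ pvRow g v, x ∈ PySem.List.dedup g.flatten := by
          intro x hx
          rcases List.mem_append.mp hx with h1 | h1
          · exact hrestst x h1
          · exact (PySem.List.mem_dedup _ _).mpr (pvRow_sub x h1)
        have hrec := ih (rest ++ pvRow g v) (PySem.Set.add seen v) hst2 hmu2
        constructor
        · intro x hx
          rcases List.mem_append.mp (by rw [hsplit]; exact hx :
              x ∈ rest ++ [v]) with h1 | h1
          · exact hrec.1 x (List.mem_append.mpr (Or.inl h1))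
          · simp at h1
            subst h1
            exact pvDfs_mono g _ _ _ _ ((PySem.Set.mem_add _ _ _).mpr (Or.inr rfl))
        · intro u hu hus w hw
          by_cases huv : u = v
          · subst huv
            exact hrec.1 w (List.mem_append.mpr (Or.inr hw))
          · exact hrec.2 u hu (fun h => by
              rcases (PySem.Set.mem_add _ _ _).mp h with h | h
              · exact hus h
              · exact huv h) w hw

lemma pvReach_mem (g : List (List Int)) (start u : Int) (fuel : Nat)
    (hfuel : pvMu g [] (pvRow g start) ≤ fuel) :
    u ∈ pvDfs g fuel (pvRow g start) [] ↔
      Relation.TransGen (pvStep g) start u := by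
  have hst : ∀ x ∈ pvRow g start, x ∈ PySem.List.dedup g.flatten :=
    fun x hx => (PySem.List.mem_dedup _ _).mpr (pvRow_sub x hx)
  have hC := pvDfs_complete g fuel (pvRow g start) [] hst hfuel
  constructor
  · intro hu
    rcases pvDfs_sound g _ _ _ _ hu with h1 | ⟨v, hv, hrt⟩
    · simp at h1
    · exact Relation.TransGen.head' (show pvStep g start v from hv) hrt
  · intro h
    induction h with
    | single h => exact hC.1 _ h
    | tail _ hstep ihh => exact hC.2 _ ihh (by simp) _ hstep

-- transporting TransGen along a pointwise equivalence that holds on the visited nodes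
lemma pvTG_congr {R1 R2 : Int → Int → Prop} {S : Int → Prop}
    (hpt : ∀ a b, S a → (R1 a b ↔ R2 a b)) (h1 : ∀ a b, R1 a b → S b) (h2 : ∀ a b, R2 a b → S b)
    {i j : Int} (hi : S i) : Relation.TransGen R1 i j ↔ Relation.TransGen R2 i j := by
  constructor
  · intro h
    exact Relation.TransGen.head_induction_on
      (motive := fun a (_ : Relation.TransGen R1 a j) => S a → Relation.TransGen R2 a j) h
      (fun {a} hr ha => Relation.TransGen.single ((hpt a j ha).mp hr))
      (fun {a c} hr _ ih ha => Relation.TransGen.head ((hpt a c ha).mp hr) (ih (h1 a c hr))) hi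
  · intro h
    exact Relation.TransGen.head_induction_on
      (motive := fun a (_ : Relation.TransGen R2 a j) => S a → Relation.TransGen R1 a j) h
      (fun {a} hr ha => Relation.TransGen.single ((hpt a j ha).mpr hr))
      (fun {a c} hr _ ih ha => Relation.TransGen.head ((hpt a c ha).mpr hr) (ih (h2 a c hr))) hi

lemma pvTG_bounds {n : Int} {edges : List (Int × Int)}
    (he : ∀ e ∈ edges, pvLab n e.1 ∧ pvLab n e.2) {a b : Int}
    (h : Relation.TransGen (pvC n edges) a b) : 1 ≤ b ∧ b ≤ n := by
  cases h with
  | single h =>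
    obtain ⟨e, he', _, hw⟩ := h
    rw [← hw]
    exact (he e he').2
  | tail _ h =>
    obtain ⟨e, he', _, hw⟩ := h
    rw [← hw]
    exact (he e he').2

lemma pvTG_bounds_src {n : Int} {edges : List (Int × Int)}
    (he : ∀ e ∈ edges, pvLab n e.1 ∧ pvLab n e.2) {a b : Int}
    (h : Relation.TransGen (pvC n edges) a b) : 1 ≤ a ∧ a ≤ n := by
  induction h with
  | single hx =>
    obtain ⟨e, he', hw, _⟩ := hx
    rw [← hw]
    exact (he e he').1
  | tail _ _ ih => exact ih

-- the length of a nodup list of students equals a countP over 1..n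
lemma pv_count_nodup_eq {n : Int} {T : List Int} (hnd : T.Nodup) (p : Int → Bool)
    (hmem : ∀ x : Int, x ∈ T ↔ (1 ≤ x ∧ x ≤ n) ∧ p x = true) :
    T.length = (pvR n).countP p := by
  rw [List.countP_eq_length_filter]
  refine ((List.perm_ext_iff_of_nodup hnd (pv_nodup_pvR.filter _)).mpr ?_).length_eq
  intro x
  rw [List.mem_filter, pv_mem_pvR, hmem]

-- reading/writing the boolean seen-array at student indices
lemma pvSeen_get_set {n : Int} {seen : List Bool} (hlen : seen.length = pvN n) (hn : 0 ≤ n)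
    {a : Int} (ha : 0 ≤ a) (ha' : a ≤ n) {u : Int} (hu : 0 ≤ u) (hu' : u ≤ n) (b : Bool) :
    PySem.List.pyGetD (PySem.List.pySetD seen a b) u false =
      if u = a then b else PySem.List.pyGetD seen u false := by
  have h1 : a.toNat < seen.length := by rw [hlen]; exact pv_toNat_lt hn ha ha'
  have h2 : u.toNat < seen.length := by rw [hlen]; exact pv_toNat_lt hn hu hu'
  rw [PySem.List.pySetD_of_nonneg _ _ ha]
  have h2' : (u:Int) < ((seen.set a.toNat b).length : Int) := by simp; omega
  rw [PySem.List.pyGetD_eq_getElem _ _ hu h2', PySem.List.pyGetD_eq_getElem _ _ hu (by omega)]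
  rw [List.getElem_set]
  by_cases hua : u = a
  · have : a.toNat = u.toNat := by omega
    rw [if_pos this, if_pos hua]
  · have : a.toNat ≠ u.toNat := by omega
    rw [if_neg this, if_neg hua]

lemma pvRow_map (g : List (List Int)) (f : Int → Int) (a : Int) :
    pvRow (g.map (List.map f)) a = (pvRow g a).map f := by
  unfold pvRow
  simp only [PySem.List.pyGetD, PySem.List.pyGet?, List.length_map]
  cases hx : PySem.List.pyIdx? g.length a with
  | none => simp [hx]
  | some k =>
    simp only [hx, Option.bind_some]
    rw [List.getElem?_map]
    cases hy : g[k]? with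
    | none => simp [hy]
    | some r => simp [hy]

lemma pv_replicate_get (k : Nat) (u : Int) :
    PySem.List.pyGetD (List.replicate k false) u false = false := by
  simp only [PySem.List.pyGetD, PySem.List.pyGet?]
  cases hx : PySem.List.pyIdx? (List.replicate k false).length u with
  | none => simp [hx]
  | some i =>
    simp only [hx, Option.bind_some]
    cases hy : (List.replicate k false)[i]? with
    | none => simp [hy]
    | some bb =>
      have hbb : bb = false := by
        rw [List.getElem?_replicate] at hy
        split at hy
        · simpa using hy.symm
        · simp at hy
      simp [hy, hbb]

lemma pv_sum_rows_le (g : List (List Int)) (l : List Int) (hnd : l.Nodup)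
    (hb : ∀ u ∈ l, 0 ≤ u ∧ u < (g.length : Int)) :
    (l.map (fun u => (pvRow g u).length)).sum ≤ g.flatten.length := by
  have hstep1 : l.map (fun u => (pvRow g u).length) =
      (l.map Int.toNat).map (fun k => (g.getD k []).length) := by
    rw [List.map_map]
    apply List.map_congr_left
    intro u hu
    obtain ⟨h0, h1⟩ := hb u hu
    have h2 : u.toNat < g.length := by omega
    simp only [Function.comp_apply]
    unfold pvRow
    rw [PySem.List.pyGetD_eq_getElem g [] h0 h1, List.getD_eq_getElem _ _ h2]
  have hmapnd : (l.map Int.toNat).Nodup := by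
    refine hnd.map_on ?_
    intro x hx y hy hxy
    have := hb x hx
    have := hb y hy
    omega
  have hsub : (l.map Int.toNat) ⊆ List.range g.length := by
    intro k hk
    rcases List.mem_map.mp hk with ⟨u, hu, rfl⟩
    have := hb u hu
    exact List.mem_range.mpr (by omega)
  obtain ⟨l2, hperm, hsl⟩ := List.Nodup.subperm hmapnd hsub
  have hrange_eq : (List.range g.length).map (fun k => (g.getD k []).length) =
      g.map List.length := by
    apply List.ext_getElem
    · simp
    · intro i h1 h2
      simp only [List.getElem_map, List.getElem_range]
      rw [List.getD_eq_getElem _ _ (by simpa using h2)]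
  calc (l.map (fun u => (pvRow g u).length)).sum
      = ((l.map Int.toNat).map (fun k => (g.getD k []).length)).sum := by rw [hstep1]
    _ = (l2.map (fun k => (g.getD k []).length)).sum :=
        ((hperm.map (fun k => (g.getD k []).length)).sum_eq).symm
    _ ≤ ((List.range g.length).map (fun k => (g.getD k []).length)).sum :=
        (hsl.map (fun k => (g.getD k []).length)).sum_le_sum (by simp)
    _ = (g.map List.length).sum := by rw [hrange_eq]
    _ = g.flatten.length := (List.length_flatten).symm

lemma pvMu_empty (g : List (List Int)) (stack : List Int) :
    pvMu g [] stack = stack.length +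
      ((PySem.List.dedup g.flatten).map (fun u => (pvRow g u).length)).sum := by
  unfold pvMu
  congr 2
  rw [List.filter_eq_self.mpr]
  intro a _
  rfl

-- B's boolean-array loop simulates the set-level DFS on wrapped labels, counting the set's growth
lemma pvSim {n : Int} (hn : 0 ≤ n) (g : List (List Int)) (hglen : g.length = pvN n)
    (hcont : ∀ x ∈ g.flatten, pvLab n x) :
    ∀ (fuel : Nat) (stack : List Int) (seen : List Bool) (cnt : Int) (S : PySem.Set Int),
      (∀ x ∈ stack, pvLab n x) → seen.length = pvN n → S.Nodup →
      (∀ u : Int, u ∈ S ↔ (0 ≤ u ∧ u ≤ n ∧ PySem.List.pyGetD seen u false = true)) →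
      pvDfsB g fuel stack seen cnt =
        cnt + ((pvDfs (g.map (List.map (pvW n))) fuel (stack.map (pvW n)) S).length : Int)
            - (S.length : Int) := by
  intro fuel
  induction fuel with
  | zero =>
    intro stack seen cnt S _ _ _ _
    show cnt = cnt + (S.length : Int) - (S.length : Int)
    ring
  | succ f ih =>
    intro stack seen cnt S hst hslen hnd hcor
    cases stack with
    | nil =>
      show cnt = cnt + (S.length : Int) - (S.length : Int)
      ring
    | cons h t =>
      have hne : (h :: t) ≠ [] := by simp
      have hvmem : (h :: t).getLast hne ∈ (h :: t) := List.getLast_mem hne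
      set v := (h :: t).getLast hne with hvdef
      have hvlab : pvLab n v := hst v hvmem
      have hv0 : 0 ≤ pvW n v := by unfold pvLab at hvlab; omega
      have hv1 : pvW n v ≤ n := hvlab.2
      have hseenW : PySem.List.pyGetD seen v false = PySem.List.pyGetD seen (pvW n v) false := by
        unfold pvW
        split_ifs with hx
        · have hbx := pvLab_bounds hvlab
          have hc : ((seen.length : Nat) : Int) = n + 1 := by rw [hslen]; unfold pvN; omega
          rw [pv_pyGetD_wrap seen false (by omega) hx, hc]
        · rfl
      have hsetW : PySem.List.pySetD seen v true = PySem.List.pySetD seen (pvW n v) true := by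
        unfold pvW
        split_ifs with hx
        · have hbx := pvLab_bounds hvlab
          have hc : ((seen.length : Nat) : Int) = n + 1 := by rw [hslen]; unfold pvN; omega
          rw [pv_pySetD_wrap seen true (by omega) hx, hc]
        · rfl
      have hredB : pvDfsB g (f+1) (h :: t) seen cnt =
          if PySem.List.pyGetD seen v false then pvDfsB g f ((h :: t).dropLast) seen cnt
          else pvDfsB g f ((h :: t).dropLast ++ pvRow g v)
            (PySem.List.pySetD seen v true) (cnt + 1) := rfl
      have hlast : ((h :: t).map (pvW n)).getLast (by simp) = pvW n v := List.getLast_map _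
      have hdropeq : ((h :: t).map (pvW n)).dropLast = ((h :: t).dropLast).map (pvW n) :=
        (List.map_dropLast).symm
      have hredS : pvDfs (g.map (List.map (pvW n))) (f+1) ((h :: t).map (pvW n)) S =
          if PySem.Set.contains S (pvW n v) then
            pvDfs (g.map (List.map (pvW n))) f (((h :: t).dropLast).map (pvW n)) S
          else pvDfs (g.map (List.map (pvW n))) f
            ((((h :: t).dropLast).map (pvW n)) ++ pvRow (g.map (List.map (pvW n))) (pvW n v))
            (PySem.Set.add S (pvW n v)) := by
        show (if PySem.Set.contains S (((h :: t).map (pvW n)).getLast (by simp)) then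
            pvDfs (g.map (List.map (pvW n))) f (((h :: t).map (pvW n)).dropLast) S
          else pvDfs (g.map (List.map (pvW n))) f ((((h :: t).map (pvW n)).dropLast) ++
              pvRow (g.map (List.map (pvW n))) (((h :: t).map (pvW n)).getLast (by simp)))
            (PySem.Set.add S (((h :: t).map (pvW n)).getLast (by simp)))) = _
        rw [hlast, hdropeq]
      have hrowv : pvRow (g.map (List.map (pvW n))) (pvW n v) = (pvRow g v).map (pvW n) := by
        rw [pvRow_map, ← pvRowW hglen hn hvlab]
      by_cases hb : PySem.List.pyGetD seen v false = true
      · have hbS : PySem.Set.contains S (pvW n v) = true := by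
          rw [PySem.Set.contains_iff]
          exact (hcor (pvW n v)).mpr ⟨hv0, hv1, by rw [← hseenW]; exact hb⟩
        rw [hredB, if_pos hb, hredS, if_pos hbS]
        exact ih ((h :: t).dropLast) seen cnt S
          (fun x hx => hst x (List.mem_of_mem_dropLast hx)) hslen hnd hcor
      · have hnotmem : pvW n v ∉ S := fun hmem => hb (by rw [hseenW]; exact ((hcor _).mp hmem).2.2)
        have hbS : ¬ PySem.Set.contains S (pvW n v) = true :=
          fun hc => hnotmem ((PySem.Set.contains_iff _ _).mp hc)
        rw [hredB, if_neg hb, hredS, if_neg hbS, hrowv, ← List.map_append]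
        have hst' : ∀ x ∈ (h :: t).dropLast ++ pvRow g v, pvLab n x := by
          intro x hx
          rcases List.mem_append.mp hx with h1 | h1
          · exact hst x (List.mem_of_mem_dropLast h1)
          · exact hcont x (pvRow_sub x h1)
        have hlen' : (PySem.List.pySetD seen v true).length = pvN n := by
          rw [PySem.List.length_pySetD]
          exact hslen
        have hnd' : (PySem.Set.add S (pvW n v)).Nodup := PySem.Set.nodup_add _ _ hnd
        have hcor' : ∀ u : Int, u ∈ PySem.Set.add S (pvW n v) ↔
            (0 ≤ u ∧ u ≤ n ∧ PySem.List.pyGetD (PySem.List.pySetD seen v true) u false = true) := by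
          intro u
          rw [PySem.Set.mem_add, hsetW]
          by_cases hu : 0 ≤ u ∧ u ≤ n
          · rw [pvSeen_get_set hslen hn hv0 hv1 hu.1 hu.2 true]
            by_cases huv : u = pvW n v
            · simp [huv, hv0, hv1]
            · rw [if_neg huv, hcor u]
              constructor
              · intro hx
                rcases hx with hx | hx
                · exact hx
                · exact absurd hx huv
              · intro hx
                exact Or.inl hx
          · constructor
            · intro hx
              rcases hx with hx | hx
              · obtain ⟨h1x, h2x, _⟩ := (hcor u).mp hx
                exact absurd ⟨h1x, h2x⟩ hu
              · subst hx
                exact absurd ⟨hv0, hv1⟩ hu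
            · intro hx
              exact absurd ⟨hx.1, hx.2.1⟩ hu
        rw [ih ((h :: t).dropLast ++ pvRow g v) (PySem.List.pySetD seen v true) (cnt + 1)
          (PySem.Set.add S (pvW n v)) hst' hlen' hnd' hcor']
        have hlenS : (PySem.Set.add S (pvW n v)).length = S.length + 1 := by
          rw [PySem.Set.add_of_not_mem hnotmem]
          simp
        rw [hlenS]
        push_cast
        ring

lemma pvCountReach_spec {n : Int} (hn : 0 ≤ n) (g : List (List Int)) (hglen : g.length = pvN n)
    (hcont : ∀ x ∈ g.flatten, pvLab n x) (start : Int) :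
    pvCountReach n g start =
      ((pvDfs (g.map (List.map (pvW n))) ((pvRow g start).length + g.flatten.length)
        ((pvRow g start).map (pvW n)) []).length : Int) := by
  unfold pvCountReach
  rw [pvSim hn g hglen hcont _ _ _ _ []
      (fun x hx => hcont x (pvRow_sub x hx))
      (by simp [pvN]) List.nodup_nil
      (by intro u; simp [pv_replicate_get])]
  simp

theorem pv_master (n : Int) (m : Int) (edges : List (Int × Int))
    (h : Pre_solution n m edges) :
    solution n m edges = solution_alt n m edges + (if n = 1 then 1 else 0) := by
  rcases h with ⟨hneg, hnil⟩ | ⟨hn, he⟩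
  · subst hnil
    have hr : PySem.List.pyRange 1 (n+1) 1 = [] := PySem.List.pyRange_one_eq_nil (by omega)
    have hr0 : PySem.List.pyRange 0 (n+1) 1 = [] := PySem.List.pyRange_one_eq_nil (by omega)
    have hrep : (n+1).toNat = 0 := by omega
    simp [solution, solution_alt, pvA_closL, pvA_cntOuter, hr, hr0, hrep,
      PySem.List.count_eq, if_neg (show ¬ n = 1 by omega)]
  have hRmem : ∀ x ∈ pvR n, 1 ≤ x ∧ x ≤ n := fun x hx => pv_mem_pvR.mp hx
  have hlenN : (List.replicate (n+1).toNat (0:Int)).length = pvN n := by simp [pvN]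
  -- == A side ==
  set g0 : List (List Int) :=
    (PySem.List.pyRange 0 (n+1) 1).map (fun _ => List.replicate (n+1).toNat (0:Int)) with hg0
  set g1 : List (List Int) := edges.foldl (fun g e => pvMSet g e.1 e.2 1) g0 with hg1
  set g2 : List (List Int) := pvA_closL (pvR n) (pvR n) (pvR n) g1 with hg2
  have hef := pvEdges_fold hn edges he g0 (pvWFg_zero hn)
  have hiff1 : ∀ i j : Int, 1 ≤ i → i ≤ n → 1 ≤ j → j ≤ n →
      (pvMGet g1 i j = 1 ↔ pvC n edges i j) := by
    intro i j h1 h2 h3 h4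
    rw [hg1, hef.2 i j h1 h2 h3 h4, pvMGet_zero hn (by omega) h2 (by omega) h4]
    constructor
    · intro hx
      rcases hx with hx | hx
      · exact absurd hx (by norm_num)
      · exact hx
    · exact Or.inr
  have hclos := pvClosL_spec hn (pvR n) hRmem g1 (pvC n edges) hef.1 hiff1
  have hE_tgt : ∀ a b : Int, pvC n edges a b → b ∈ pvR n := by
    intro a b hx
    obtain ⟨e, he', _, hw⟩ := hx
    rw [← hw]
    exact pv_mem_pvR.mpr (he e he').2
  have hTGm : ∀ i j : Int, 1 ≤ i → i ≤ n → 1 ≤ j → j ≤ n →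
      (pvMGet g2 i j = 1 ↔ Relation.TransGen (pvC n edges) i j) := by
    intro i j h1 h2 h3 h4
    rw [hg2, hclos.2 i j h1 h2 h3 h4, pvWrel_iff_PB, pvPB_iff_transGen hE_tgt]
  -- A's counting phase
  set a1 : List Int := pvA_cntOuter g2 (pvR n) (pvR n) (List.replicate (n+1).toNat (0:Int))
      with ha1def
  have hcnt := pvA_cntOuter_spec hn g2 (pvR n) hRmem _ hlenN
  have hgetA : ∀ v : Int, 0 ≤ v → v ≤ n →
      PySem.List.pyGetD a1 v 0 = if 1 ≤ v then pvDegA n g2 v else 0 := by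
    intro v hv hv'
    rw [ha1def, hcnt.2 v hv hv', pv_a0_get hn hv hv', zero_add, pv_sumOuter g2 v hv hv']
  have hla1 : a1.length = pvN n := hcnt.1
  have ha1 : a1 = (PySem.List.pyRange 0 (n+1) 1).map
      (fun v => if 1 ≤ v then pvDegA n g2 v else 0) := by
    apply List.ext_getElem
    · rw [hla1]
      simp [PySem.List.length_pyRange_one, pvN]
    · intro w hw1 hw2
      have hwn : (w:Int) ≤ n := by
        rw [hla1] at hw1
        unfold pvN at hw1
        omega
      have hL : ((w:Int)) < (a1.length : Int) := by rw [hla1]; unfold pvN; omega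
      have hgw : a1[w] = PySem.List.pyGetD a1 (w:Int) 0 := by
        rw [PySem.List.pyGetD_eq_getElem a1 0 (by positivity) hL]
        simp
      rw [hgw, hgetA (w:Int) (by positivity) hwn]
      rw [List.getElem_map, PySem.List.getElem_pyRange_one]
      simp
  -- == B side ==
  set init : List (List Int) := (PySem.List.pyRange 0 (n+1) 1).map (fun _ => ([] : List Int))
    with hinit
  set adj : List (List Int) := edges.foldl (fun g e => pvAdjPush g (Prod.fst e) (Prod.snd e)) init
    with hadjdef
  set radj : List (List Int) := edges.foldl (fun g e => pvAdjPush g (Prod.snd e) (Prod.fst e)) init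
    with hradjdef
  have hBc : solution_alt n m edges =
      (pvR n).foldl (fun acc v =>
        if pvCountReach n adj v + pvCountReach n radj v = n - 1 then acc + 1 else acc) 0 := by
    simp only [solution_alt]
    simp only [PySem.List.foldl_prod_mk (f := fun s (e : Int × Int) => pvAdjPush s e.1 e.2)
      (g := fun s (e : Int × Int) => pvAdjPush s e.2 e.1)]
    rfl
  have hadj := pvBuild_spec hn Prod.fst Prod.snd edges (fun e hee => (he e hee).1) init
    (pvInit_len hn)
  have hradj := pvBuild_spec hn Prod.snd Prod.fst edges (fun e hee => (he e hee).2) init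
    (pvInit_len hn)
  have hadjlen : adj.length = pvN n := hadj.1
  have hradjlen : radj.length = pvN n := hradj.1
  have hcontA : ∀ x ∈ adj.flatten, pvLab n x := by
    intro x hx
    rcases hadj.2.1 x hx with hh | ⟨e, hee, hbe⟩
    · rw [hinit, pvInit_flatten] at hh
      simp at hh
    · rw [hbe]
      exact (he e hee).2
  have hcontR : ∀ x ∈ radj.flatten, pvLab n x := by
    intro x hx
    rcases hradj.2.1 x hx with hh | ⟨e, hee, hbe⟩
    · rw [hinit, pvInit_flatten] at hh
      simp at hh
    · rw [hbe]
      exact (he e hee).1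
  have hrowA : ∀ a : Int, 1 ≤ a → a ≤ n → ∀ b : Int,
      (b ∈ pvRow adj a ↔ ∃ e ∈ edges, pvW n e.1 = a ∧ e.2 = b) := by
    intro a h1 h2 b
    rw [hadjdef, hadj.2.2 a h1 h2 b, pvInit_row]
    simp only [List.not_mem_nil, false_or]
  have hrowR : ∀ a : Int, 1 ≤ a → a ≤ n → ∀ b : Int,
      (b ∈ pvRow radj a ↔ ∃ e ∈ edges, pvW n e.2 = a ∧ e.1 = b) := by
    intro a h1 h2 b
    rw [hradjdef, hradj.2.2 a h1 h2 b, pvInit_row]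
    simp only [List.not_mem_nil, false_or]
  -- per-node reachability counts against A's closed matrix
  have hcount : ∀ (G : List (List Int)), G.length = pvN n → (∀ x ∈ G.flatten, pvLab n x) →
      ∀ v : Int,
      pvCountReach n G v =
        ((pvDfs (G.map (List.map (pvW n)))
          ((pvRow G v).length + G.flatten.length)
          (pvRow (G.map (List.map (pvW n))) v) []).length : Int) := by
    intro G hGlen hGcont v
    rw [pvCountReach_spec hn G hGlen hGcont v, pvRow_map]
  have hfuelok : ∀ (G : List (List Int)), G.length = pvN n → (∀ x ∈ G.flatten, pvLab n x) →
      ∀ v : Int,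
      pvMu (G.map (List.map (pvW n))) [] (pvRow (G.map (List.map (pvW n))) v) ≤
        (pvRow G v).length + G.flatten.length := by
    intro G hGlen hGcont v
    rw [pvMu_empty, pvRow_map, List.length_map]
    have hflat : (G.map (List.map (pvW n))).flatten = G.flatten.map (pvW n) :=
      (List.map_flatten).symm
    have hsum : ((PySem.List.dedup (G.map (List.map (pvW n))).flatten).map
        (fun u => (pvRow (G.map (List.map (pvW n))) u).length)).sum ≤
        (G.map (List.map (pvW n))).flatten.length := by
      apply pv_sum_rows_le
      · exact PySem.List.nodup_dedup _
      · intro u hu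
        have hu2 : u ∈ (G.map (List.map (pvW n))).flatten :=
          (PySem.List.mem_dedup _ _).mp hu
        rw [hflat] at hu2
        rcases List.mem_map.mp hu2 with ⟨x, hx, rfl⟩
        have hlx := hGcont x hx
        have hL : ((G.map (List.map (pvW n))).length : Int) = n + 1 := by
          rw [List.length_map, hGlen]
          unfold pvN
          omega
        rw [hL]
        unfold pvLab at hlx
        omega
    have hfl : (G.map (List.map (pvW n))).flatten.length = G.flatten.length := by
      rw [hflat, List.length_map]
    omega
  have hstepiff : ∀ (G : List (List Int)) (R : Int → Int → Prop),
      (∀ a : Int, 1 ≤ a → a ≤ n → ∀ b : Int,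
        (b ∈ pvRow (G.map (List.map (pvW n))) a ↔ R a b)) →
      (∀ x ∈ G.flatten, pvLab n x) →
      (∀ a b : Int, R a b → 1 ≤ b ∧ b ≤ n) →
      ∀ v u : Int, 1 ≤ v → v ≤ n →
      (Relation.TransGen (pvStep (G.map (List.map (pvW n)))) v u ↔
        Relation.TransGen R v u) := by
    intro G R hrows hGcont hRb v u h1 h2
    have hcontW : ∀ a b : Int, pvStep (G.map (List.map (pvW n))) a b → 1 ≤ b ∧ b ≤ n := by
      intro a b hx
      have hbf := pvRow_sub b hx
      have hflat : (G.map (List.map (pvW n))).flatten = G.flatten.map (pvW n) :=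
        (List.map_flatten).symm
      rw [hflat] at hbf
      rcases List.mem_map.mp hbf with ⟨x, hx2, rfl⟩
      exact hGcont x hx2
    exact pvTG_congr (S := fun a => 1 ≤ a ∧ a ≤ n)
      (fun a b ha => hrows a ha.1 ha.2 b)
      hcontW hRb ⟨h1, h2⟩
  have hrowAW : ∀ a : Int, 1 ≤ a → a ≤ n → ∀ b : Int,
      (b ∈ pvRow (adj.map (List.map (pvW n))) a ↔ pvC n edges a b) := by
    intro a h1 h2 b
    rw [pvRow_map]
    unfold pvC
    constructor
    · intro hx
      rcases List.mem_map.mp hx with ⟨raw, hraw, rfl⟩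
      obtain ⟨e, hee, hw1, hw2⟩ := (hrowA a h1 h2 raw).mp hraw
      exact ⟨e, hee, hw1, by rw [hw2]⟩
    · rintro ⟨e, hee, hw1, hw2⟩
      refine List.mem_map.mpr ⟨e.2, ?_, hw2⟩
      exact (hrowA a h1 h2 e.2).mpr ⟨e, hee, hw1, rfl⟩
  have hrowRW : ∀ a : Int, 1 ≤ a → a ≤ n → ∀ b : Int,
      (b ∈ pvRow (radj.map (List.map (pvW n))) a ↔ pvC n edges b a) := by
    intro a h1 h2 b
    rw [pvRow_map]
    unfold pvC
    constructor
    · intro hx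
      rcases List.mem_map.mp hx with ⟨raw, hraw, rfl⟩
      obtain ⟨e, hee, hw1, hw2⟩ := (hrowR a h1 h2 raw).mp hraw
      exact ⟨e, hee, by rw [hw2], hw1⟩
    · rintro ⟨e, hee, hw1, hw2⟩
      refine List.mem_map.mpr ⟨e.1, ?_, hw1⟩
      exact (hrowR a h1 h2 e.1).mpr ⟨e, hee, hw2, rfl⟩
  have hFv : ∀ v : Int, 1 ≤ v → v ≤ n → pvCountReach n adj v = (pvOut n g2 v : Int) := by
    intro v h1 h2
    rw [hcount adj hadjlen hcontA v]
    have hlen : (pvDfs (adj.map (List.map (pvW n)))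
        ((pvRow adj v).length + adj.flatten.length)
        (pvRow (adj.map (List.map (pvW n))) v) []).length =
        (pvR n).countP (fun t => pvMGet g2 v t == 1) := by
      apply pv_count_nodup_eq (pvDfs_nodup _ _ _ _ List.nodup_nil)
      intro x
      rw [pvReach_mem _ v x _ (hfuelok adj hadjlen hcontA v),
          hstepiff adj (pvC n edges) hrowAW hcontA
            (fun a b hx => pvTG_bounds he (Relation.TransGen.single hx)) v x h1 h2]
      constructor
      · intro hx
        have hbx := pvTG_bounds he hx
        exact ⟨hbx, by simp [(hTGm v x h1 h2 hbx.1 hbx.2).mpr hx]⟩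
      · rintro ⟨⟨h3, h4⟩, h5⟩
        exact (hTGm v x h1 h2 h3 h4).mp (by simpa using h5)
    rw [hlen]
    rfl
  have hRv : ∀ v : Int, 1 ≤ v → v ≤ n → pvCountReach n radj v = (pvIn n g2 v : Int) := by
    intro v h1 h2
    rw [hcount radj hradjlen hcontR v]
    have hlen : (pvDfs (radj.map (List.map (pvW n)))
        ((pvRow radj v).length + radj.flatten.length)
        (pvRow (radj.map (List.map (pvW n))) v) []).length =
        (pvR n).countP (fun f => pvMGet g2 f v == 1) := by
      apply pv_count_nodup_eq (pvDfs_nodup _ _ _ _ List.nodup_nil)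
      intro x
      rw [pvReach_mem _ v x _ (hfuelok radj hradjlen hcontR v),
          hstepiff radj (fun a b => pvC n edges b a) hrowRW hcontR
            (fun a b hx => pvTG_bounds_src he (Relation.TransGen.single hx)) v x h1 h2]
      have hsw : Relation.TransGen (fun a b => pvC n edges b a) v x ↔
          Relation.TransGen (pvC n edges) x v := Relation.transGen_swap
      rw [hsw]
      constructor
      · intro hx
        have hbx := pvTG_bounds_src he hx
        exact ⟨hbx, by simp [(hTGm x v hbx.1 hbx.2 h1 h2).mpr hx]⟩
      · rintro ⟨⟨h3, h4⟩, h5⟩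
        exact (hTGm x v h3 h4 h1 h2).mp (by simpa using h5)
    rw [hlen]
    rfl
  -- == assemble ==
  have hsol : solution n m edges = (PySem.List.count a1 (n-1) : Int) := rfl
  rw [hsol, hBc,
      PySem.List.foldl_ite_add_one
        (fun v => pvCountReach n adj v + pvCountReach n radj v = n - 1) (pvR n) 0,
      zero_add]
  rw [ha1, PySem.List.count_eq, List.count_eq_countP, List.countP_map]
  have hsplit : PySem.List.pyRange 0 (n+1) 1 = 0 :: PySem.List.pyRange 1 (n+1) 1 :=
    PySem.List.pyRange_one_cons (by omega)
  rw [hsplit, List.countP_cons]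
  have hq0 : ((fun x => x == n - 1) ∘ fun v => if 1 ≤ v then pvDegA n g2 v else 0) 0 =
      decide ((0:Int) = n - 1) := by
    have h0 : ¬ (1:Int) ≤ 0 := by omega
    simp only [Function.comp_apply, if_neg h0]
    by_cases hx : (0:Int) = n - 1
    · simp [hx]
    · simp [hx]
  have hqR : List.countP ((fun x => x == n - 1) ∘ fun v => if 1 ≤ v then pvDegA n g2 v else 0)
        (PySem.List.pyRange 1 (n+1) 1) =
      List.countP (fun v => decide (pvCountReach n adj v + pvCountReach n radj v = n - 1))
        (pvR n) := by
    apply List.countP_congr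
    intro v hvR
    obtain ⟨h1, h2⟩ := pv_mem_pvR.mp hvR
    rw [Function.comp_apply, if_pos h1]
    rw [hFv v h1 h2, hRv v h1 h2]
    unfold pvDegA
    simp
  rw [hqR, hq0]
  push_cast
  simp only [decide_eq_true_eq]
  by_cases hone : n = 1
  · rw [if_pos (by omega : (0:Int) = n - 1), if_pos hone]
  · rw [if_neg (by omega : ¬ (0:Int) = n - 1), if_neg hone]

-- ===== VERDICT (by name: the statement is the Claim_ definition above) =====
theorem solution_spec : Claim_unchanged_solution := by
  intro n m edges _ hpre hD
  have := pv_master n m edges hpre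
  unfold D_solution at hD
  simp [hD] at this
  exact this

theorem solution_changed : Claim_changed_solution := by
  unfold Claim_changed_solution; decide

theorem solution_tight : Claim_exact_solution := by
  intro n m edges _ hpre hD
  have := pv_master n m edges hpre
  unfold D_solution at hD
  subst hD
  simp at this
  omega
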